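-- pv_equiv track=rewrite | github.com/elubandisrivyshnavi-cpu/python | project 1.py | min_cut_insert_moves
-- ===== SOURCE A (Python) =====
-- def min_cut_insert_moves(N, shuffled, original):
--     pos = {}
--     for idx, instr in enumerate(original):
--         # use exact instruction strings (after rstrip) for mapping
--         pos[instr.rstrip("\n")] = idx
--     try:
--         perm = tuple(pos[s.rstrip("\n")] for s in shuffled)
--     except KeyError:
--         # If some instruction in shuffled not in original, impossible
--         return -1
--     target = tuple(range(N))
--     if perm == target:
--         return 0
--
--     # BFS using list-as-queue to avoid relying on collections
--     queue = [perm]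
--     head = 0
--     dist = {perm: 0}
--     while head < len(queue):
--         cur = queue[head]
--         head += 1
--         d = dist[cur]
--         for i in range(N):
--             for j in range(i, N):
--                 seg = cur[i:j+1]
--                 rest = cur[:i] + cur[j+1:]
--                 for k in range(len(rest) + 1):
--                     if k == i:
--                         continue
--                     new = rest[:k] + seg + rest[k:]
--                     if new == target:
--                         return d + 1
--                     if new not in dist:
--                         dist[new] = d + 1
--                         queue.append(new)
--     return -1
-- ===== SOURCE B (Python) =====
-- def min_cut_insert_moves(N, shuffled, original):
--     pos = {}
--     for idx, instr in enumerate(original):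
--         pos[instr.rstrip("\n")] = idx
--     perm = []
--     for s in shuffled:
--         key = s.rstrip("\n")
--         if key not in pos:
--             return -1
--         perm.append(pos[key])
--     perm = tuple(perm)
--     target = tuple(range(N))
--     if perm == target:
--         return 0
--     # cut-and-insert moves preserve the multiset of entries, so the sorted
--     # state is reachable iff perm is exactly a permutation of 0..N-1
--     if sorted(perm) != list(range(N)):
--         return -1
--
--     def can_reach(cur, depth):
--         # depth-limited DFS over cut-and-insert moves
--         if cur == target:
--             return True
--         if depth == 0:
--             return False
--         for i in range(N):
--             for j in range(i, N):
--                 seg = cur[i:j+1]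
--                 rest = cur[:i] + cur[j+1:]
--                 for k in range(len(rest) + 1):
--                     if k == i:
--                         continue
--                     if can_reach(rest[:k] + seg + rest[k:], depth - 1):
--                         return True
--         return False
--
--     # iterative deepening: a solvable instance sorts in at most N-1 moves
--     # (one single-element move extends the sorted prefix each time)
--     for d in range(1, N):
--         if can_reach(perm, d):
--             return d
--     return -1
-- ===== Notes on version B (the rewrite author's own statement) =====
-- stated objective: alternative
-- what changed: B replaces A's breadth-first search (explicit queue, head pointer, distance dictionary over all reachable states) by iterative-deepening depth-first search: a recursive depth-limited DFS can_reach with no queue or visited set, run for increasing depth bounds 1..N-1, after an O(n log n) sorted-permutation test that settles unsolvable inputs upfront (A discovers unsolvability only by exhausting the whole reachable component by BFS).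
import Mathlib
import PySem

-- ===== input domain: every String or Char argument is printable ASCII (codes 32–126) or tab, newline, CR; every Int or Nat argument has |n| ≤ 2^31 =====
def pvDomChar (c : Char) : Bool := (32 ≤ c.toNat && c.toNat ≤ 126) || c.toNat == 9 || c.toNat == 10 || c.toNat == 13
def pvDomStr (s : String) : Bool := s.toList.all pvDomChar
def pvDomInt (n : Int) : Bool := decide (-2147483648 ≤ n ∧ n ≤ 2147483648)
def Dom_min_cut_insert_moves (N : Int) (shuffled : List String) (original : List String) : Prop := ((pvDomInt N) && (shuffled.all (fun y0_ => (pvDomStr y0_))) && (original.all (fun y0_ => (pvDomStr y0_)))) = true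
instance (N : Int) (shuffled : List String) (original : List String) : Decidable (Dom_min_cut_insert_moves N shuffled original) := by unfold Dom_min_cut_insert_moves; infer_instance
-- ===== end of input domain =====

-- B replaces A's breadth-first search (queue, head pointer, distance dictionary) by
-- iterative-deepening depth-first search — a recursive depth-limited DFS run for increasing
-- depth bounds 1..N-1 — after an upfront sorted-permutation solvability test; same values,
-- no speed claim.

-- ===== PORT A =====
-- s.rstrip("\n"): drop trailing newline characters (hand port, exact for every string)
def pvRstripNL (s : String) : String :=
  String.ofList ((s.toList.reverse.dropWhile (fun c => c == '\n')).reverse)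

-- pos = {}; for idx, instr in enumerate(original): pos[instr.rstrip("\n")] = idx
def pvPos (original : List String) : PySem.Dict String Int :=
  (PySem.List.enumerate original 0).foldl (fun d p => d.insert (pvRstripNL p.2) p.1) PySem.Dict.empty

-- perm = tuple(pos[s.rstrip("\n")] for s in shuffled) — none = the KeyError branch
def pvPermA (pos : PySem.Dict String Int) : List String → Option (List Int)
  | [] => some []
  | s :: ss =>
    match pos.get? (pvRstripNL s) with
    | none => none
    | some v => (pvPermA pos ss).map (fun t => v :: t)

-- for k in range(len(rest)+1): …
def pvKloopA (target seg rest : List Int) (i d : Int) :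
    List Int → PySem.Dict (List Int) Int → List (List Int) →
    Sum (PySem.Dict (List Int) Int × List (List Int)) Int
  | [], dist, queue => .inl (dist, queue)
  | k :: ks, dist, queue =>
    if k = i then pvKloopA target seg rest i d ks dist queue
    else
      let nw := PySem.List.slice rest none (some k) ++ seg ++ PySem.List.slice rest (some k) none
      if nw = target then .inr (d + 1)
      else if dist.contains nw then pvKloopA target seg rest i d ks dist queue
      else pvKloopA target seg rest i d ks (dist.insert nw (d + 1)) (queue ++ [nw])

-- for j in range(i, N): …
def pvJloopA (target cur : List Int) (i d : Int) :
    List Int → PySem.Dict (List Int) Int → List (List Int) →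
    Sum (PySem.Dict (List Int) Int × List (List Int)) Int
  | [], dist, queue => .inl (dist, queue)
  | j :: js, dist, queue =>
    let seg := PySem.List.slice cur (some i) (some (j + 1))
    let rest := PySem.List.slice cur none (some i) ++ PySem.List.slice cur (some (j + 1)) none
    match pvKloopA target seg rest i d (PySem.List.pyRange 0 (PySem.List.len rest + 1) 1) dist queue with
    | .inr r => .inr r
    | .inl (dist', queue') => pvJloopA target cur i d js dist' queue'

-- for i in range(N): …
def pvIloopA (N : Int) (target cur : List Int) (d : Int) :
    List Int → PySem.Dict (List Int) Int → List (List Int) →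
    Sum (PySem.Dict (List Int) Int × List (List Int)) Int
  | [], dist, queue => .inl (dist, queue)
  | i :: is, dist, queue =>
    match pvJloopA target cur i d (PySem.List.pyRange i N 1) dist queue with
    | .inr r => .inr r
    | .inl (dist', queue') => pvIloopA N target cur d is dist' queue'

-- while head < len(queue): … (fuel only makes the loop total; it is proved larger than the
-- number of iterations, which is at most the number of distinct states plus one)
def pvMainA (N : Int) (target : List Int) :
    Nat → List (List Int) → Nat → PySem.Dict (List Int) Int → Int
  | 0, _, _, _ => -1
  | fuel + 1, queue, head, dist =>
    if h : head < queue.length then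
      let cur := queue[head]
      let d := dist.getD cur 0  -- dist[cur]: every queue entry is a key of dist
      match pvIloopA N target cur d (PySem.List.pyRange 0 N 1) dist queue with
      | .inr r => r
      | .inl (dist', queue') => pvMainA N target fuel queue' (head + 1) dist'
    else -1

def min_cut_insert_moves (N : Int) (shuffled : List String) (original : List String) : Int :=
  let pos := pvPos original
  match pvPermA pos shuffled with
  | none => -1
  | some perm =>
    let target := PySem.List.pyRange 0 N 1
    if perm = target then 0
    else pvMainA N target (original.length ^ shuffled.length + 2) [perm] 0
           (PySem.Dict.empty.insert perm 0)

-- ===== PORT B =====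
-- perm = []; for s in shuffled: key = s.rstrip("\n"); if key not in pos: return -1; perm.append(pos[key])
def pvPermBuildB (pos : PySem.Dict String Int) : List String → List Int → Option (List Int)
  | [], acc => some acc
  | s :: ss, acc =>
    let key := pvRstripNL s
    if pos.contains key then pvPermBuildB pos ss (acc ++ [(pos.get? key).getD 0])
    else none

-- def can_reach(cur, depth): depth-limited DFS; the nested for/return-True loops are `any`
-- (depth is a non-negative int at every call, ported as Nat)
def pvCanReach (N : Int) (target : List Int) (depth : Nat) (cur : List Int) : Bool :=
  if cur = target then true
  else match depth with
    | 0 => false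
    | d + 1 =>
      (PySem.List.pyRange 0 N 1).any fun i =>
        (PySem.List.pyRange i N 1).any fun j =>
          let seg := PySem.List.slice cur (some i) (some (j + 1))
          let rest := PySem.List.slice cur none (some i) ++ PySem.List.slice cur (some (j + 1)) none
          (PySem.List.pyRange 0 (PySem.List.len rest + 1) 1).any fun k =>
            if k = i then false
            else pvCanReach N target d (PySem.List.slice rest none (some k) ++ seg ++ PySem.List.slice rest (some k) none)

-- for d in range(1, N): if can_reach(perm, d): return d   (then return -1)
def pvIterDeep (N : Int) (target perm : List Int) : List Int → Int
  | [] => -1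
  | d :: ds => if pvCanReach N target d.toNat perm then d else pvIterDeep N target perm ds

def min_cut_insert_moves_alt (N : Int) (shuffled : List String) (original : List String) : Int :=
  let pos := pvPos original
  match pvPermBuildB pos shuffled [] with
  | none => -1
  | some perm =>
    let target := PySem.List.pyRange 0 N 1
    if perm = target then 0
    else if PySem.List.sorted perm (fun x => x) false = PySem.List.pyRange 0 N 1 then
      pvIterDeep N target perm (PySem.List.pyRange 1 N 1)
    else -1

-- ===== PRECONDITION & SPEC =====
def Spec_min_cut_insert_moves (N : Int) (shuffled : List String) (original : List String) (out : Int) : Prop := out = min_cut_insert_moves_alt N shuffled original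
instance (N : Int) (shuffled : List String) (original : List String) (out : Int) : Decidable (Spec_min_cut_insert_moves N shuffled original out) := by unfold Spec_min_cut_insert_moves; infer_instance

-- ===== CLAIM (what is proved, stated in full; the proofs are below) =====
def Claim_equal_min_cut_insert_moves : Prop := ∀ (N : Int) (shuffled : List String) (original : List String), Dom_min_cut_insert_moves N shuffled original → Spec_min_cut_insert_moves N shuffled original (min_cut_insert_moves N shuffled original)

-- ===== LEMMAS AND PROOFS =====

-- the candidate state rest[:k] + seg + rest[k:] (the common subterm of all the move loops)
def pvNew (seg rest : List Int) (k : Int) : List Int :=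
  PySem.List.slice rest none (some k) ++ seg ++ PySem.List.slice rest (some k) none

-- level-synchronized frontier BFS: the intermediate program both ports are related to
def pvKloopB (target seg rest : List Int) (i d : Int) :
    List Int → PySem.Set (List Int) → List (List Int) →
    Sum (PySem.Set (List Int) × List (List Int)) Int
  | [], vis, nxt => .inl (vis, nxt)
  | k :: ks, vis, nxt =>
    if k = i then pvKloopB target seg rest i d ks vis nxt
    else
      let nw := PySem.List.slice rest none (some k) ++ seg ++ PySem.List.slice rest (some k) none
      if nw = target then .inr d
      else if PySem.Set.contains vis nw then pvKloopB target seg rest i d ks vis nxt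
      else pvKloopB target seg rest i d ks (PySem.Set.add vis nw) (nxt ++ [nw])

def pvJloopB (n : Int) (target cur : List Int) (i d : Int) :
    List Int → PySem.Set (List Int) → List (List Int) →
    Sum (PySem.Set (List Int) × List (List Int)) Int
  | [], vis, nxt => .inl (vis, nxt)
  | j :: js, vis, nxt =>
    let seg := PySem.List.slice cur (some i) (some (j + 1))
    let rest := PySem.List.slice cur none (some i) ++ PySem.List.slice cur (some (j + 1)) none
    match pvKloopB target seg rest i d (PySem.List.pyRange 0 (PySem.List.len rest + 1) 1) vis nxt with
    | .inr r => .inr r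
    | .inl (vis', nxt') => pvJloopB n target cur i d js vis' nxt'

def pvIloopB (n : Int) (target cur : List Int) (d : Int) :
    List Int → PySem.Set (List Int) → List (List Int) →
    Sum (PySem.Set (List Int) × List (List Int)) Int
  | [], vis, nxt => .inl (vis, nxt)
  | i :: is, vis, nxt =>
    match pvJloopB n target cur i d (PySem.List.pyRange i n 1) vis nxt with
    | .inr r => .inr r
    | .inl (vis', nxt') => pvIloopB n target cur d is vis' nxt'

def pvLevelB (n : Int) (target : List Int) (d : Int) :
    List (List Int) → PySem.Set (List Int) → List (List Int) →
    Sum (PySem.Set (List Int) × List (List Int)) Int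
  | [], vis, nxt => .inl (vis, nxt)
  | cur :: rest, vis, nxt =>
    match pvIloopB n target cur d (PySem.List.pyRange 0 n 1) vis nxt with
    | .inr r => .inr r
    | .inl (vis', nxt') => pvLevelB n target d rest vis' nxt'

def pvMainB (n : Int) (target : List Int) :
    Nat → List (List Int) → PySem.Set (List Int) → Int → Int
  | 0, _, _, _ => -1
  | fuel + 1, frontier, vis, d =>
    if frontier = [] then -1
    else
      match pvLevelB n target (d + 1) frontier vis [] with
      | .inr r => r
      | .inl (vis', nxt) => pvMainB n target fuel nxt vis' (d + 1)

lemma pvNew_perm (seg rest : List Int) (k : Int) (hk : 0 ≤ k) :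
    (pvNew seg rest k).Perm (seg ++ rest) := by
  unfold pvNew
  rw [PySem.List.slice_to rest hk, PySem.List.slice_from rest hk]
  have h1 := List.perm_append_comm_assoc (rest.take k.toNat) seg (rest.drop k.toNat)
  simpa [List.append_assoc, List.take_append_drop] using h1

lemma pvSegRest_perm (cur : List Int) (i j : Int) (h0 : 0 ≤ i) (hij : i ≤ j) :
    (PySem.List.slice cur (some i) (some (j + 1)) ++
      (PySem.List.slice cur none (some i) ++ PySem.List.slice cur (some (j + 1)) none)).Perm cur := by
  rw [PySem.List.slice_toNat cur h0 (by omega), PySem.List.slice_to cur h0,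
      PySem.List.slice_from cur (by omega : (0:Int) ≤ j + 1)]
  have him : i.toNat + ((j + 1).toNat - i.toNat) = (j + 1).toNat := by omega
  have hsplit : cur.take i.toNat ++ ((cur.drop i.toNat).take ((j + 1).toNat - i.toNat) ++
      cur.drop (j + 1).toNat) = cur := by
    have h3 : (cur.drop i.toNat).drop ((j + 1).toNat - i.toNat) = cur.drop (j + 1).toNat := by
      rw [List.drop_drop, him]
    rw [← h3, List.take_append_drop, List.take_append_drop]
  conv_rhs => rw [← hsplit]
  exact List.perm_append_comm_assoc _ _ _

lemma pvKloop_corr (target seg rest : List Int) (i dA : Int) :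
    ∀ (ks : List Int), (∀ k ∈ ks, 0 ≤ k) →
    ∀ (dist : PySem.Dict (List Int) Int) (queue nxt : List (List Int)),
      (∃ r, pvKloopA target seg rest i dA ks dist queue = .inr r ∧
            pvKloopB target seg rest i (dA + 1) ks dist.keys nxt = .inr r ∧
            target.Perm (seg ++ rest)) ∨
      (∃ dist' Δ,
        pvKloopA target seg rest i dA ks dist queue = .inl (dist', queue ++ Δ) ∧
        pvKloopB target seg rest i (dA + 1) ks dist.keys nxt = .inl (dist.keys ++ Δ, nxt ++ Δ) ∧
        dist'.keys = dist.keys ++ Δ ∧ Δ.Nodup ∧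
        (∀ x ∈ Δ, x ∉ dist.keys ∧ x.Perm (seg ++ rest) ∧ dist'.get? x = some (dA + 1)) ∧
        (∀ x, x ∉ Δ → dist'.get? x = dist.get? x)) := by
  intro ks
  induction ks with
  | nil =>
    intro _ dist queue nxt
    right
    exact ⟨dist, [], by simp [pvKloopA], by simp [pvKloopB], by simp, by simp, by simp, by simp⟩
  | cons k ks ih =>
    intro hks dist queue nxt
    have hk0 : 0 ≤ k := hks k (List.mem_cons_self)
    have hks' : ∀ k' ∈ ks, 0 ≤ k' := fun k' h => hks k' (List.mem_cons_of_mem _ h)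
    by_cases hki : k = i
    · simp only [pvKloopA, pvKloopB, if_pos hki]
      exact ih hks' dist queue nxt
    · by_cases htar : pvNew seg rest k = target
      · left
        refine ⟨dA + 1, ?_, ?_, htar ▸ pvNew_perm seg rest k hk0⟩
        · simp only [pvKloopA, if_neg hki]
          rw [if_pos (by simpa [pvNew] using htar)]
        · simp only [pvKloopB, if_neg hki]
          rw [if_pos (by simpa [pvNew] using htar)]
      · by_cases hmem : pvNew seg rest k ∈ dist.keys
        · have hcA : dist.contains (pvNew seg rest k) = true :=
            (PySem.Dict.contains_iff_mem_keys dist _).mpr hmem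
          have hcB : PySem.Set.contains dist.keys (pvNew seg rest k) = true :=
            (PySem.Set.contains_iff dist.keys _).mpr hmem
          have hA : pvKloopA target seg rest i dA (k :: ks) dist queue
              = pvKloopA target seg rest i dA ks dist queue := by
            simp only [pvKloopA, if_neg hki]
            rw [if_neg (by simpa [pvNew] using htar), if_pos (by simpa [pvNew] using hcA)]
          have hB : pvKloopB target seg rest i (dA + 1) (k :: ks) dist.keys nxt
              = pvKloopB target seg rest i (dA + 1) ks dist.keys nxt := by
            simp only [pvKloopB, if_neg hki]
            rw [if_neg (by simpa [pvNew] using htar), if_pos (by simpa [pvNew] using hcB)]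
          rw [hA, hB]
          exact ih hks' dist queue nxt
        · have hcA : dist.contains (pvNew seg rest k) = false := by
            by_contra h
            exact hmem ((PySem.Dict.contains_iff_mem_keys dist _).mp (by simpa using h))
          have hcB : PySem.Set.contains dist.keys (pvNew seg rest k) = false := by
            by_contra h
            exact hmem ((PySem.Set.contains_iff dist.keys _).mp (by simpa using h))
          have hadd : PySem.Set.add dist.keys (pvNew seg rest k) = dist.keys ++ [pvNew seg rest k] := by
            unfold PySem.Set.add
            rw [hcB]
            simp
          have hkeys2 : (dist.insert (pvNew seg rest k) (dA + 1)).keys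
              = dist.keys ++ [pvNew seg rest k] :=
            PySem.Dict.keys_insert_of_not_contains dist _ hcA
          have hA : pvKloopA target seg rest i dA (k :: ks) dist queue
              = pvKloopA target seg rest i dA ks (dist.insert (pvNew seg rest k) (dA + 1))
                  (queue ++ [pvNew seg rest k]) := by
            simp only [pvKloopA, if_neg hki]
            rw [if_neg (by simpa [pvNew] using htar), if_neg (by simpa [pvNew] using hcA)]
            simp [pvNew]
          have hB : pvKloopB target seg rest i (dA + 1) (k :: ks) dist.keys nxt
              = pvKloopB target seg rest i (dA + 1) ks
                  (dist.insert (pvNew seg rest k) (dA + 1)).keys (nxt ++ [pvNew seg rest k]) := by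
            simp only [pvKloopB, if_neg hki]
            rw [if_neg (by simpa [pvNew] using htar), if_neg (by simpa [pvNew] using hcB)]
            rw [hkeys2, ← hadd]
            simp [pvNew]
          rw [hA, hB]
          rcases ih hks' (dist.insert (pvNew seg rest k) (dA + 1))
              (queue ++ [pvNew seg rest k]) (nxt ++ [pvNew seg rest k]) with
            ⟨r, h1, h2, h3⟩ | ⟨dist', Δ, h1, h2, h3, h4, h5, h6⟩
          · exact Or.inl ⟨r, h1, h2, h3⟩
          · right
            have hnwmem2 : pvNew seg rest k ∈ (dist.insert (pvNew seg rest k) (dA + 1)).keys := by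
              rw [hkeys2]; simp
            have hnwnotΔ : pvNew seg rest k ∉ Δ := fun h => (h5 _ h).1 hnwmem2
            refine ⟨dist', pvNew seg rest k :: Δ, ?_, ?_, ?_, ?_, ?_, ?_⟩
            · rw [h1]; simp
            · rw [h2, hkeys2]; simp
            · rw [h3, hkeys2]; simp
            · exact List.nodup_cons.mpr ⟨hnwnotΔ, h4⟩
            · intro x hx
              rcases List.mem_cons.mp hx with rfl | hx'
              · refine ⟨hmem, pvNew_perm seg rest k hk0, ?_⟩
                rw [h6 _ hnwnotΔ, PySem.Dict.get?_insert_self]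
              · obtain ⟨hn2, hp, hg⟩ := h5 x hx'
                refine ⟨fun h => hn2 (by rw [hkeys2]; exact List.mem_append_left _ h), hp, hg⟩
            · intro x hx
              have hxnw : x ≠ pvNew seg rest k := fun h => hx (h ▸ List.mem_cons_self)
              have hxΔ : x ∉ Δ := fun h => hx (List.mem_cons_of_mem _ h)
              rw [h6 _ hxΔ, PySem.Dict.get?_insert_of_ne dist _ hxnw]

lemma pvJloop_corr (n : Int) (target cur : List Int) (i dA : Int) (hi : 0 ≤ i) :
    ∀ (js : List Int), (∀ j ∈ js, i ≤ j) →
    ∀ (dist : PySem.Dict (List Int) Int) (queue nxt : List (List Int)),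
      (∃ r, pvJloopA target cur i dA js dist queue = .inr r ∧
            pvJloopB n target cur i (dA + 1) js dist.keys nxt = .inr r ∧
            target.Perm cur) ∨
      (∃ dist' Δ,
        pvJloopA target cur i dA js dist queue = .inl (dist', queue ++ Δ) ∧
        pvJloopB n target cur i (dA + 1) js dist.keys nxt = .inl (dist.keys ++ Δ, nxt ++ Δ) ∧
        dist'.keys = dist.keys ++ Δ ∧ Δ.Nodup ∧
        (∀ x ∈ Δ, x ∉ dist.keys ∧ x.Perm cur ∧ dist'.get? x = some (dA + 1)) ∧
        (∀ x, x ∉ Δ → dist'.get? x = dist.get? x)) := by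
  intro js
  induction js with
  | nil =>
    intro _ dist queue nxt
    right
    exact ⟨dist, [], by simp [pvJloopA], by simp [pvJloopB], by simp, by simp, by simp, by simp⟩
  | cons j js ih =>
    intro hjs dist queue nxt
    have hij : i ≤ j := hjs j (List.mem_cons_self)
    have hjs' : ∀ j' ∈ js, i ≤ j' := fun j' h => hjs j' (List.mem_cons_of_mem _ h)
    have hsr := pvSegRest_perm cur i j hi hij
    set seg := PySem.List.slice cur (some i) (some (j + 1)) with hseg
    set rest := PySem.List.slice cur none (some i) ++ PySem.List.slice cur (some (j + 1)) none
      with hrest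
    have hks : ∀ k ∈ PySem.List.pyRange 0 (PySem.List.len rest + 1) 1, 0 ≤ k := by
      intro k hk
      exact (PySem.List.mem_pyRange_one.mp hk).1
    rcases pvKloop_corr target seg rest i dA _ hks dist queue nxt with
      ⟨r, h1, h2, h3⟩ | ⟨dist1, Δ1, h1, h2, h3, h4, h5, h6⟩
    · left
      refine ⟨r, ?_, ?_, h3.trans hsr⟩
      · simp only [pvJloopA]; rw [← hseg, ← hrest, h1]
      · simp only [pvJloopB]; rw [← hseg, ← hrest, h2]
    · have hA : pvJloopA target cur i dA (j :: js) dist queue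
          = pvJloopA target cur i dA js dist1 (queue ++ Δ1) := by
        simp only [pvJloopA]; rw [← hseg, ← hrest, h1]
      have hB : pvJloopB n target cur i (dA + 1) (j :: js) dist.keys nxt
          = pvJloopB n target cur i (dA + 1) js dist1.keys (nxt ++ Δ1) := by
        simp only [pvJloopB]; rw [← hseg, ← hrest, h2, h3]
      rw [hA, hB]
      rcases ih hjs' dist1 (queue ++ Δ1) (nxt ++ Δ1) with
        ⟨r, g1, g2, g3⟩ | ⟨dist2, Δ2, g1, g2, g3, g4, g5, g6⟩
      · exact Or.inl ⟨r, g1, g2, g3⟩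
      · right
        have hΔ2fresh : ∀ x ∈ Δ2, x ∉ dist.keys ∧ x ∉ Δ1 := by
          intro x hx
          have := (g5 x hx).1
          rw [h3] at this
          exact ⟨fun h => this (List.mem_append_left _ h),
                 fun h => this (List.mem_append_right _ h)⟩
        refine ⟨dist2, Δ1 ++ Δ2, ?_, ?_, ?_, ?_, ?_, ?_⟩
        · rw [g1]; simp [List.append_assoc]
        · rw [g2, h3]; simp [List.append_assoc]
        · rw [g3, h3]; simp [List.append_assoc]
        · rw [List.nodup_append]
          exact ⟨h4, g4, fun a ha b hb hab => (hΔ2fresh b hb).2 (hab ▸ ha)⟩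
        · intro x hx
          rcases List.mem_append.mp hx with hx1 | hx2
          · obtain ⟨ha, hp, hg⟩ := h5 x hx1
            have hxΔ2 : x ∉ Δ2 := by
              intro hmem2
              exact (hΔ2fresh x hmem2).2 hx1
            exact ⟨ha, hp.trans hsr, by rw [g6 x hxΔ2]; exact hg⟩
          · obtain ⟨ha, hp, hg⟩ := g5 x hx2
            exact ⟨(hΔ2fresh x hx2).1, hp, hg⟩
        · intro x hx
          rw [g6 x (fun h => hx (List.mem_append_right _ h)),
              h6 x (fun h => hx (List.mem_append_left _ h))]

lemma pvIloop_corr (N n : Int) (hnN : n = N) (target cur : List Int) (dA : Int) :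
    ∀ (is : List Int), (∀ i ∈ is, 0 ≤ i) →
    ∀ (dist : PySem.Dict (List Int) Int) (queue nxt : List (List Int)),
      (∃ r, pvIloopA N target cur dA is dist queue = .inr r ∧
            pvIloopB n target cur (dA + 1) is dist.keys nxt = .inr r ∧
            target.Perm cur) ∨
      (∃ dist' Δ,
        pvIloopA N target cur dA is dist queue = .inl (dist', queue ++ Δ) ∧
        pvIloopB n target cur (dA + 1) is dist.keys nxt = .inl (dist.keys ++ Δ, nxt ++ Δ) ∧
        dist'.keys = dist.keys ++ Δ ∧ Δ.Nodup ∧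
        (∀ x ∈ Δ, x ∉ dist.keys ∧ x.Perm cur ∧ dist'.get? x = some (dA + 1)) ∧
        (∀ x, x ∉ Δ → dist'.get? x = dist.get? x)) := by
  subst hnN
  intro is
  induction is with
  | nil =>
    intro _ dist queue nxt
    right
    exact ⟨dist, [], by simp [pvIloopA], by simp [pvIloopB], by simp, by simp, by simp, by simp⟩
  | cons i is ih =>
    intro his dist queue nxt
    have hi : 0 ≤ i := his i (List.mem_cons_self)
    have his' : ∀ i' ∈ is, 0 ≤ i' := fun i' h => his i' (List.mem_cons_of_mem _ h)
    have hjsA : ∀ j ∈ PySem.List.pyRange i n 1, i ≤ j := fun j h =>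
      (PySem.List.mem_pyRange_one.mp h).1
    rcases pvJloop_corr n target cur i dA hi (PySem.List.pyRange i n 1) hjsA dist queue nxt with
      ⟨r, h1, h2, h3⟩ | ⟨dist1, Δ1, h1, h2, h3, h4, h5, h6⟩
    · left
      refine ⟨r, ?_, ?_, h3⟩
      · simp only [pvIloopA]; rw [h1]
      · simp only [pvIloopB]; rw [h2]
    · have hA : pvIloopA n target cur dA (i :: is) dist queue
          = pvIloopA n target cur dA is dist1 (queue ++ Δ1) := by
        simp only [pvIloopA]; rw [h1]
      have hB : pvIloopB n target cur (dA + 1) (i :: is) dist.keys nxt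
          = pvIloopB n target cur (dA + 1) is dist1.keys (nxt ++ Δ1) := by
        simp only [pvIloopB]; rw [h2, h3]
      rw [hA, hB]
      rcases ih his' dist1 (queue ++ Δ1) (nxt ++ Δ1) with
        ⟨r, g1, g2, g3⟩ | ⟨dist2, Δ2, g1, g2, g3, g4, g5, g6⟩
      · exact Or.inl ⟨r, g1, g2, g3⟩
      · right
        have hΔ2fresh : ∀ x ∈ Δ2, x ∉ dist.keys ∧ x ∉ Δ1 := by
          intro x hx
          have := (g5 x hx).1
          rw [h3] at this
          exact ⟨fun h => this (List.mem_append_left _ h),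
                 fun h => this (List.mem_append_right _ h)⟩
        refine ⟨dist2, Δ1 ++ Δ2, ?_, ?_, ?_, ?_, ?_, ?_⟩
        · rw [g1]; simp [List.append_assoc]
        · rw [g2, h3]; simp [List.append_assoc]
        · rw [g3, h3]; simp [List.append_assoc]
        · rw [List.nodup_append]
          exact ⟨h4, g4, fun a ha b hb hab => (hΔ2fresh b hb).2 (hab ▸ ha)⟩
        · intro x hx
          rcases List.mem_append.mp hx with hx1 | hx2
          · obtain ⟨ha, hp, hg⟩ := h5 x hx1
            have hxΔ2 : x ∉ Δ2 := fun hmem2 => (hΔ2fresh x hmem2).2 hx1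
            exact ⟨ha, hp, by rw [g6 x hxΔ2]; exact hg⟩
          · obtain ⟨ha, hp, hg⟩ := g5 x hx2
            exact ⟨(hΔ2fresh x hx2).1, hp, hg⟩
        · intro x hx
          rw [g6 x (fun h => hx (List.mem_append_right _ h)),
              h6 x (fun h => hx (List.mem_append_left _ h))]

lemma pvMainA_cons (N : Int) (target : List Int) (fuel : Nat) (pre tail : List (List Int))
    (cur : List Int) (dist : PySem.Dict (List Int) Int) :
    pvMainA N target (fuel + 1) (pre ++ cur :: tail) pre.length dist =
      (match pvIloopA N target cur (dist.getD cur 0) (PySem.List.pyRange 0 N 1) dist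
          (pre ++ cur :: tail) with
      | .inr r => r
      | .inl (dist', queue') => pvMainA N target fuel queue' (pre.length + 1) dist') := by
  have hlt : pre.length < (pre ++ cur :: tail).length := by simp
  have hget : (pre ++ cur :: tail)[pre.length]'hlt = cur := by
    rw [List.getElem_append_right (Nat.le_refl _)]
    simp
  simp only [pvMainA, dif_pos hlt, hget]

lemma pvMainA_end (N : Int) (target : List Int) (fuel : Nat) (queue : List (List Int))
    (head : Nat) (dist : PySem.Dict (List Int) Int) (h : ¬ head < queue.length) :
    pvMainA N target (fuel + 1) queue head dist = -1 := by
  simp only [pvMainA, dif_neg h]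

lemma pvLevel_corr (N : Int) (target P : List Int) (dA : Int) :
    ∀ (frontier pre acc : List (List Int)) (dist : PySem.Dict (List Int) Int),
      dist.keys = pre ++ frontier ++ acc →
      (∀ s ∈ frontier, dist.get? s = some dA) →
      (∀ s ∈ acc, dist.get? s = some (dA + 1)) →
      (∀ s ∈ frontier, s.Perm P) →
      ((∃ r, pvLevelB N target (dA + 1) frontier dist.keys acc = .inr r ∧
             ∀ f, pvMainA N target (frontier.length + f + 1) (pre ++ frontier ++ acc)
                 pre.length dist = r) ∨
       (∃ dist' Δ,
         pvLevelB N target (dA + 1) frontier dist.keys acc = .inl (dist.keys ++ Δ, acc ++ Δ) ∧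
         dist'.keys = dist.keys ++ Δ ∧ Δ.Nodup ∧
         (∀ x ∈ Δ, x ∉ dist.keys ∧ x.Perm P ∧ dist'.get? x = some (dA + 1)) ∧
         (∀ x, x ∉ Δ → dist'.get? x = dist.get? x) ∧
         (∀ f, pvMainA N target (frontier.length + f) (pre ++ frontier ++ acc) pre.length dist
             = pvMainA N target f (pre ++ frontier ++ acc ++ Δ) (pre.length + frontier.length)
                 dist'))) := by
  intro frontier
  induction frontier with
  | nil =>
    intro pre acc dist hkeys hfr hacc hfP
    right
    refine ⟨dist, [], by simp [pvLevelB], by simp, by simp, by simp, by simp, ?_⟩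
    intro f
    simp
  | cons cur rest ih =>
    intro pre acc dist hkeys hfr hacc hfP
    have hcurP : cur.Perm P := hfP cur (List.mem_cons_self)
    have hcurd : dist.getD cur 0 = dA := by
      rw [PySem.Dict.getD_eq_get?_getD, hfr cur (List.mem_cons_self)]
      rfl
    have his : ∀ i ∈ PySem.List.pyRange 0 N 1, 0 ≤ i := fun i h =>
      (PySem.List.mem_pyRange_one.mp h).1
    rcases pvIloop_corr N N rfl target cur dA (PySem.List.pyRange 0 N 1) his dist
        (pre ++ (cur :: rest) ++ acc) acc with
      ⟨r, h1, h2, h3⟩ | ⟨dist1, Δ1, h1, h2, h3, h4, h5, h6⟩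
    · left
      refine ⟨r, ?_, ?_⟩
      · simp only [pvLevelB]; rw [h2]
      · intro f
        have : (cur :: rest).length + f + 1 = (rest.length + (f + 1)) + 1 := by simp; omega
        rw [this]
        have hq : pre ++ (cur :: rest) ++ acc = pre ++ cur :: (rest ++ acc) := by simp
        rw [hq, pvMainA_cons, hcurd, ← hq, h1]
    · have hΔ1fresh : ∀ x ∈ Δ1, x ∉ dist.keys := fun x hx => (h5 x hx).1
      have hstep : ∀ f, pvMainA N target ((cur :: rest).length + f)
            (pre ++ (cur :: rest) ++ acc) pre.length dist
          = pvMainA N target (rest.length + f) ((pre ++ [cur]) ++ rest ++ (acc ++ Δ1))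
              (pre ++ [cur]).length dist1 := by
        intro f
        have hfu : (cur :: rest).length + f = (rest.length + f) + 1 := by simp; omega
        rw [hfu]
        have hq : pre ++ (cur :: rest) ++ acc = pre ++ cur :: (rest ++ acc) := by simp
        rw [hq, pvMainA_cons, hcurd, ← hq, h1]
        have hq2 : (pre ++ (cur :: rest) ++ acc) ++ Δ1
            = (pre ++ [cur]) ++ rest ++ (acc ++ Δ1) := by simp
        rw [hq2]
        simp
      have hkeys1' : dist1.keys = (pre ++ [cur]) ++ rest ++ (acc ++ Δ1) := by
        rw [h3, hkeys]; simp
      have hfr1 : ∀ s ∈ rest, dist1.get? s = some dA := by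
        intro s hs
        have hsk : s ∈ dist.keys := by rw [hkeys]; simp [hs]
        rw [h6 s (fun h => hΔ1fresh s h hsk)]
        exact hfr s (List.mem_cons_of_mem _ hs)
      have hacc1 : ∀ s ∈ acc ++ Δ1, dist1.get? s = some (dA + 1) := by
        intro s hs
        rcases List.mem_append.mp hs with hs1 | hs2
        · have hsk : s ∈ dist.keys := by rw [hkeys]; simp [hs1]
          rw [h6 s (fun h => hΔ1fresh s h hsk)]
          exact hacc s hs1
        · exact (h5 s hs2).2.2
      have hfP1 : ∀ s ∈ rest, s.Perm P := fun s hs => hfP s (List.mem_cons_of_mem _ hs)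
      have hlevel : pvLevelB N target (dA + 1) (cur :: rest) dist.keys acc
          = pvLevelB N target (dA + 1) rest dist1.keys (acc ++ Δ1) := by
        simp only [pvLevelB]; rw [h2, h3]
      rcases ih (pre ++ [cur]) (acc ++ Δ1) dist1 hkeys1' hfr1 hacc1 hfP1 with
        ⟨r, g1, g2⟩ | ⟨dist2, Δ2, g1, g2, g3, g4, g5, g6⟩
      · left
        refine ⟨r, by rw [hlevel, g1], ?_⟩
        intro f
        have : (cur :: rest).length + f + 1 = (cur :: rest).length + (f + 1) := by omega
        rw [this, hstep (f + 1)]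
        have := g2 f
        simpa using this
      · right
        have hΔ2fresh : ∀ x ∈ Δ2, x ∉ dist.keys ∧ x ∉ Δ1 := by
          intro x hx
          have := (g4 x hx).1
          rw [h3] at this
          exact ⟨fun h => this (List.mem_append_left _ h),
                 fun h => this (List.mem_append_right _ h)⟩
        refine ⟨dist2, Δ1 ++ Δ2, ?_, ?_, ?_, ?_, ?_, ?_⟩
        · rw [hlevel, g1, h3]; simp [List.append_assoc]
        · rw [g2, h3]; simp [List.append_assoc]
        · rw [List.nodup_append]
          exact ⟨h4, g3, fun a ha b hb hab => (hΔ2fresh b hb).2 (hab ▸ ha)⟩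
        · intro x hx
          rcases List.mem_append.mp hx with hx1 | hx2
          · obtain ⟨ha, hp, hg⟩ := h5 x hx1
            have hxΔ2 : x ∉ Δ2 := fun hm => (hΔ2fresh x hm).2 hx1
            exact ⟨ha, hp.trans hcurP, by rw [g5 x hxΔ2]; exact hg⟩
          · obtain ⟨ha, hp, hg⟩ := g4 x hx2
            exact ⟨(hΔ2fresh x hx2).1, hp, hg⟩
        · intro x hx
          rw [g5 x (fun h => hx (List.mem_append_right _ h)),
              h6 x (fun h => hx (List.mem_append_left _ h))]
        · intro f
          rw [hstep f]
          have := g6 f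
          have e1 : (pre ++ [cur]) ++ rest ++ (acc ++ Δ1)
              = pre ++ (cur :: rest) ++ acc ++ Δ1 := by simp
          have e2 : (pre ++ [cur]) ++ rest ++ (acc ++ Δ1) ++ Δ2
              = pre ++ (cur :: rest) ++ acc ++ (Δ1 ++ Δ2) := by simp
          have e3 : (pre ++ [cur]).length + rest.length = pre.length + (cur :: rest).length := by
            simp; omega
          rw [this, e2, e3]

-- any duplicate-free collection of rearrangements of P has at most |P|^|P| elements
lemma pvCardBound (P : List Int) (vis : List (List Int)) (hnd : vis.Nodup)
    (hp : ∀ s ∈ vis, s.Perm P) : vis.length ≤ P.length ^ P.length := by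
  rcases Nat.eq_zero_or_pos P.length with hL | hL
  · have hPnil : P = [] := List.length_eq_zero_iff.mp hL
    subst hPnil
    match vis, hnd, hp with
    | [], _, _ => simp
    | [x], _, _ => simp
    | x :: y :: t, hnd, hp =>
      have hx : x = [] := List.Perm.eq_nil (hp x (by simp))
      have hy : y = [] := List.Perm.eq_nil (hp y (by simp))
      rw [List.nodup_cons] at hnd
      exact absurd (by simp [hx, hy] : x ∈ y :: t) hnd.1
  · set L := P.length with hLdef
    set f : List Int → (Fin L → Fin L) :=
      fun s => fun idx => ⟨min (List.idxOf (s.getD idx.val 0) P) (L - 1), by omega⟩ with hf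
    have hfval : ∀ s ∈ vis, ∀ (idx : Fin L), (f s idx).val = List.idxOf (s.getD idx.val 0) P := by
      intro s hs idx
      have hlen : s.length = L := (hp s hs).length_eq
      have hmem : s.getD idx.val 0 ∈ P := by
        rw [List.getD_eq_getElem s 0 (by omega)]
        exact (hp s hs).mem_iff.mp (List.getElem_mem _)
      have := List.idxOf_lt_length_of_mem hmem
      simp only [hf]
      omega
    have hinj : ∀ x ∈ vis, ∀ y ∈ vis, f x = f y → x = y := by
      intro x hx y hy hxy
      have hlx : x.length = L := (hp x hx).length_eq
      have hly : y.length = L := (hp y hy).length_eq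
      apply List.ext_getElem (by omega)
      intro idx h1 h2
      have hidx : idx < L := by omega
      have e1 := hfval x hx ⟨idx, hidx⟩
      have e2 := hfval y hy ⟨idx, hidx⟩
      rw [congrFun hxy ⟨idx, hidx⟩] at e1
      have hmx : x.getD idx 0 ∈ P := by
        rw [List.getD_eq_getElem x 0 (by omega)]
        exact (hp x hx).mem_iff.mp (List.getElem_mem _)
      have hmy : y.getD idx 0 ∈ P := by
        rw [List.getD_eq_getElem y 0 (by omega)]
        exact (hp y hy).mem_iff.mp (List.getElem_mem _)
      have : x.getD idx 0 = y.getD idx 0 := by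
        have gx := List.getElem_idxOf (xs := P) (x := x.getD idx 0)
          (List.idxOf_lt_length_of_mem hmx)
        have gy := List.getElem_idxOf (xs := P) (x := y.getD idx 0)
          (List.idxOf_lt_length_of_mem hmy)
        rw [← gx, ← gy]
        have e1' : (f y ⟨idx, hidx⟩).val = List.idxOf (x.getD idx 0) P := by simpa using e1
        have e2' : (f y ⟨idx, hidx⟩).val = List.idxOf (y.getD idx 0) P := by simpa using e2
        congr 1
        omega
      rwa [List.getD_eq_getElem x 0 (by omega), List.getD_eq_getElem y 0 (by omega)] at this
    have hmap : (vis.map f).Nodup := hnd.map_on hinj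
    have := hmap.length_le_card
    simpa [Fintype.card_fun] using this

lemma pvMain_corr (N : Int) (target P : List Int) (C : Nat)
    (hbound : ∀ vis : List (List Int), vis.Nodup → (∀ s ∈ vis, s.Perm P) → vis.length ≤ C) :
    ∀ (fuelB : Nat) (frontier pre : List (List Int)) (dist : PySem.Dict (List Int) Int)
      (dA : Int) (fuelA : Nat),
      dist.keys = pre ++ frontier →
      (∀ s ∈ frontier, dist.get? s = some dA) →
      (∀ s ∈ dist.keys, s.Perm P) →
      dist.keys.Nodup →
      C + 2 ≤ fuelA + pre.length →
      C + 2 ≤ fuelB + pre.length + frontier.length →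
      pvMainA N target fuelA (pre ++ frontier) pre.length dist
        = pvMainB N target fuelB frontier dist.keys dA := by
  intro fuelB
  induction fuelB with
  | zero =>
    intro frontier pre dist dA fuelA hkeys hfr hperm hnd hfA hfB
    have h1 : dist.keys.length ≤ C := hbound _ hnd hperm
    rw [hkeys] at h1
    simp at h1
    omega
  | succ fuelB ih =>
    intro frontier pre dist dA fuelA hkeys hfr hperm hnd hfA hfB
    have hlenC : pre.length + frontier.length ≤ C := by
      have h1 : dist.keys.length ≤ C := hbound _ hnd hperm
      rw [hkeys] at h1
      simpa using h1
    by_cases hfrnil : frontier = []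
    · subst hfrnil
      have hfA2 : 2 ≤ fuelA := by simp at hlenC; omega
      obtain ⟨fa, rfl⟩ : ∃ fa, fuelA = fa + 1 := ⟨fuelA - 1, by omega⟩
      rw [pvMainA_end _ _ _ _ _ _ (by simp)]
      simp [pvMainB]
    · have hkeys' : dist.keys = pre ++ frontier ++ [] := by simpa using hkeys
      have hfrP : ∀ s ∈ frontier, s.Perm P := by
        intro s hs
        exact hperm s (by rw [hkeys]; exact List.mem_append_right _ hs)
      rcases pvLevel_corr N target P dA frontier pre [] dist hkeys' hfr (by simp) hfrP with
        ⟨r, hB, hAeq⟩ | ⟨dist1, Δ, hB, hkeys1, hndΔ, hmemΔ, hpres, hAeq⟩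
      · have hBr : pvMainB N target (fuelB + 1) frontier dist.keys dA = r := by
          simp only [pvMainB, if_neg hfrnil]
          rw [hB]
        rw [hBr]
        obtain ⟨f, rfl⟩ : ∃ f, fuelA = frontier.length + f + 1 :=
          ⟨fuelA - frontier.length - 1, by omega⟩
        have := hAeq f
        simpa using this
      · have hBr : pvMainB N target (fuelB + 1) frontier dist.keys dA
            = pvMainB N target fuelB Δ (dist.keys ++ Δ) (dA + 1) := by
          simp only [pvMainB, if_neg hfrnil]
          rw [hB]
          simp
        rw [hBr]
        obtain ⟨f, rfl⟩ : ∃ f, fuelA = frontier.length + f :=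
          ⟨fuelA - frontier.length, by omega⟩
        have hstep := hAeq f
        simp only [List.append_nil] at hstep
        rw [hstep]
        have hkeys1' : dist1.keys = (pre ++ frontier) ++ Δ := by
          rw [hkeys1, hkeys]
        have hfr1 : ∀ s ∈ Δ, dist1.get? s = some (dA + 1) := fun s hs => (hmemΔ s hs).2.2
        have hperm1 : ∀ s ∈ dist1.keys, s.Perm P := by
          intro s hs
          rw [hkeys1] at hs
          rcases List.mem_append.mp hs with h1 | h2
          · exact hperm s h1
          · exact (hmemΔ s h2).2.1
        have hnd1 : dist1.keys.Nodup := by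
          rw [hkeys1, List.nodup_append]
          exact ⟨hnd, hndΔ, fun a ha b hb hab => (hmemΔ b hb).1 (hab ▸ ha)⟩
        by_cases hΔnil : Δ = []
        · subst hΔnil
          have hf2 : 2 ≤ f := by omega
          obtain ⟨f', rfl⟩ : ∃ f', f = f' + 1 := ⟨f - 1, by omega⟩
          rw [pvMainA_end _ _ _ _ _ _ (by simp)]
          obtain ⟨fb, rfl⟩ : ∃ fb, fuelB = fb + 1 := ⟨fuelB - 1, by omega⟩
          simp [pvMainB]
        · have hΔlen : 1 ≤ Δ.length := by
            cases Δ with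
            | nil => exact absurd rfl hΔnil
            | cons a t => simp
          have := ih Δ (pre ++ frontier) dist1 (dA + 1) f hkeys1' hfr1 hperm1 hnd1
            (by simp; omega) (by simp; omega)
          rw [hkeys1] at this
          simpa [List.append_assoc] using this

-- if the target is not a rearrangement of the start state, A's BFS loop always returns -1
lemma pvMainA_noTarget (N : Int) (target P : List Int) (hnt : ¬ target.Perm P) :
    ∀ (fuel : Nat) (queue : List (List Int)) (head : Nat) (dist : PySem.Dict (List Int) Int),
      (∀ s ∈ queue, s.Perm P) →
      pvMainA N target fuel queue head dist = -1 := by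
  intro fuel
  induction fuel with
  | zero => intro queue head dist _; simp [pvMainA]
  | succ fuel ih =>
    intro queue head dist hq
    by_cases h : head < queue.length
    · have hcur : queue[head] ∈ queue := List.getElem_mem h
      have hcurP : (queue[head]'h).Perm P := hq _ hcur
      have his : ∀ i ∈ PySem.List.pyRange 0 N 1, 0 ≤ i := fun i hi =>
        (PySem.List.mem_pyRange_one.mp hi).1
      rcases pvIloop_corr N N rfl target (queue[head]'h) (dist.getD (queue[head]'h) 0)
          (PySem.List.pyRange 0 N 1) his dist queue [] with
        ⟨r, h1, h2, h3⟩ | ⟨dist1, Δ1, h1, h2, h3, h4, h5, h6⟩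
      · exact absurd (h3.trans hcurP) hnt
      · simp only [pvMainA, dif_pos h]
        rw [h1]
        apply ih
        intro s hs
        rcases List.mem_append.mp hs with hs1 | hs2
        · exact hq s hs1
        · exact ((h5 s hs2).2.1).trans hcurP
    · exact pvMainA_end _ _ _ _ _ _ h

-- every value stored in pos is an index into original
lemma pvPos_values_aux (l : List (Int × String)) (d : PySem.Dict String Int) (s : String) (v : Int) :
    (l.foldl (fun d p => d.insert (pvRstripNL p.2) p.1) d).get? s = some v →
    d.get? s = some v ∨ ∃ p ∈ l, v = p.1 := by
  induction l generalizing d with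
  | nil => intro h; exact Or.inl h
  | cons p l ih =>
    intro h
    rcases ih _ h with h1 | ⟨q, hq, hv⟩
    · by_cases he : s = pvRstripNL p.2
      · subst he
        rw [PySem.Dict.get?_insert_self] at h1
        exact Or.inr ⟨p, List.mem_cons_self, (Option.some_injective _ h1).symm⟩
      · rw [PySem.Dict.get?_insert_of_ne _ _ he] at h1
        exact Or.inl h1
    · exact Or.inr ⟨q, List.mem_cons_of_mem _ hq, hv⟩

lemma pvPos_values (original : List String) (s : String) (v : Int) :
    (pvPos original).get? s = some v → 0 ≤ v ∧ v < (original.length : Int) := by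
  intro h
  rcases pvPos_values_aux _ _ _ _ h with h1 | ⟨p, hp, hv⟩
  · rw [PySem.Dict.get?_empty] at h1; exact absurd h1 (by simp)
  · obtain ⟨k, hk, rfl⟩ := (PySem.List.mem_enumerate_iff original 0 p).mp hp
    subst hv
    simp
    omega

-- facts about the tuple A builds
lemma pvPermA_facts (pos : PySem.Dict String Int) :
    ∀ (ss : List String) (perm : List Int), pvPermA pos ss = some perm →
      perm.length = ss.length ∧ ∀ v ∈ perm, ∃ s, pos.get? (pvRstripNL s) = some v := by
  intro ss
  induction ss with
  | nil =>
    intro perm h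
    simp only [pvPermA] at h
    cases h
    simp
  | cons s ss ih =>
    intro perm h
    simp only [pvPermA] at h
    cases hg : pos.get? (pvRstripNL s) with
    | none => rw [hg] at h; cases h
    | some v =>
      rw [hg] at h
      cases hrec : pvPermA pos ss with
      | none => rw [hrec] at h; cases h
      | some t =>
        rw [hrec] at h
        simp at h
        obtain ⟨hlen, hmem⟩ := ih t hrec
        subst h
        refine ⟨by simp [hlen], ?_⟩
        intro v' hv'
        rcases List.mem_cons.mp hv' with rfl | hm
        · exact ⟨s, hg⟩
        · exact hmem v' hm

-- B's accumulator loop is A's tuple builder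
lemma pvPermBuildB_eq (pos : PySem.Dict String Int) :
    ∀ (ss : List String) (acc : List Int),
      pvPermBuildB pos ss acc = (pvPermA pos ss).map (fun t => acc ++ t) := by
  intro ss
  induction ss with
  | nil => intro acc; simp [pvPermA, pvPermBuildB]
  | cons s ss ih =>
    intro acc
    simp only [pvPermA, pvPermBuildB]
    cases hg : pos.get? (pvRstripNL s) with
    | none =>
      rw [PySem.Dict.contains_eq_isSome_get?, hg]
      simp
    | some v =>
      rw [PySem.Dict.contains_eq_isSome_get?, hg]
      simp only [Option.isSome_some, Option.getD_some]
      rw [ih (acc ++ [v])]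
      cases pvPermA pos ss with
      | none => simp
      | some t => simp

-- sorted(perm) == list(range(N)) says exactly that perm is a permutation of range(N)
lemma pvSorted_iff (perm : List Int) (N : Int) :
    PySem.List.sorted perm (fun x => x) false = PySem.List.pyRange 0 N 1 ↔
      perm.Perm (PySem.List.pyRange 0 N 1) := by
  constructor
  · intro h
    exact (h ▸ PySem.List.sorted_perm perm (fun x => x) false).symm
  · intro h
    exact PySem.List.sorted_eq_of_perm_of_pairwise_lt perm (PySem.List.pyRange 0 N 1)
      (fun x => x) h.symm (PySem.List.pairwise_lt_pyRange_one 0 N)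

-- ===== the move graph: neighbour sets, bounded paths =====
def pvSeg (cur : List Int) (i j : Int) : List Int := PySem.List.slice cur (some i) (some (j + 1))
def pvRest (cur : List Int) (i j : Int) : List Int :=
  PySem.List.slice cur none (some i) ++ PySem.List.slice cur (some (j + 1)) none

def pvGenK (seg rest : List Int) (i : Int) (ks : List Int) : List (List Int) :=
  ks.filterMap fun k => if k = i then none else some (pvNew seg rest k)

def pvGenJ (cur : List Int) (i : Int) (js : List Int) : List (List Int) :=
  js.flatMap fun j =>
    pvGenK (pvSeg cur i j) (pvRest cur i j) i
      (PySem.List.pyRange 0 (PySem.List.len (pvRest cur i j) + 1) 1)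

def pvGenI (N : Int) (cur : List Int) (is : List Int) : List (List Int) :=
  is.flatMap fun i => pvGenJ cur i (PySem.List.pyRange i N 1)

def pvNbrs (N : Int) (cur : List Int) : List (List Int) :=
  pvGenI N cur (PySem.List.pyRange 0 N 1)

def pvPathN (N : Int) : Nat → List Int → List Int → Prop
  | 0, x, y => x = y
  | d + 1, x, y => x = y ∨ ∃ z ∈ pvNbrs N x, pvPathN N d z y

lemma mem_pvNbrs (N : Int) (cur x : List Int) :
    x ∈ pvNbrs N cur ↔ ∃ i ∈ PySem.List.pyRange 0 N 1, ∃ j ∈ PySem.List.pyRange i N 1,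
      ∃ k ∈ PySem.List.pyRange 0 (PySem.List.len (pvRest cur i j) + 1) 1,
        k ≠ i ∧ x = pvNew (pvSeg cur i j) (pvRest cur i j) k := by
  simp only [pvNbrs, pvGenI, pvGenJ, pvGenK, List.mem_flatMap, List.mem_filterMap,
    Option.ite_none_left_eq_some, Option.some.injEq]
  constructor
  · rintro ⟨i, hi, j, hj, k, hk, hki, rfl⟩
    exact ⟨i, hi, j, hj, k, hk, hki, rfl⟩
  · rintro ⟨i, hi, j, hj, k, hk, hki, rfl⟩
    exact ⟨i, hi, j, hj, k, hk, hki, rfl⟩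

lemma pvNbrs_perm (N : Int) (cur x : List Int) (h : x ∈ pvNbrs N cur) : x.Perm cur := by
  rw [mem_pvNbrs] at h
  obtain ⟨i, hi, j, hj, k, hk, hki, rfl⟩ := h
  have h0i : 0 ≤ i := (PySem.List.mem_pyRange_one.mp hi).1
  have hij : i ≤ j := (PySem.List.mem_pyRange_one.mp hj).1
  have h0k : 0 ≤ k := (PySem.List.mem_pyRange_one.mp hk).1
  have h1 := pvNew_perm (pvSeg cur i j) (pvRest cur i j) k h0k
  have h2 := pvSegRest_perm cur i j h0i hij
  exact h1.trans (by simpa [pvSeg, pvRest] using h2)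

lemma pvPathN_refl (N : Int) (d : Nat) (x : List Int) : pvPathN N d x x := by
  cases d with
  | zero => rfl
  | succ d => exact Or.inl rfl

lemma pvPathN_mono (N : Int) (d : Nat) (x y : List Int) (h : pvPathN N d x y) :
    pvPathN N (d + 1) x y := by
  induction d generalizing x with
  | zero => exact Or.inl h
  | succ d ih =>
    rcases h with rfl | ⟨z, hz, hp⟩
    · exact Or.inl rfl
    · exact Or.inr ⟨z, hz, ih z hp⟩

lemma pvPathN_snoc (N : Int) (d : Nat) (x y z : List Int) (h : pvPathN N d x y)
    (hz : z ∈ pvNbrs N y) : pvPathN N (d + 1) x z := by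
  induction d generalizing x with
  | zero => cases h; exact Or.inr ⟨z, hz, rfl⟩
  | succ d ih =>
    rcases h with rfl | ⟨w, hw, hp⟩
    · exact Or.inr ⟨z, hz, pvPathN_refl N _ z⟩
    · exact Or.inr ⟨w, hw, ih w hp⟩

lemma pvPathN_inv (N : Int) (d : Nat) (x z : List Int) (h : pvPathN N (d + 1) x z) :
    pvPathN N d x z ∨ ∃ y, pvPathN N d x y ∧ z ∈ pvNbrs N y := by
  induction d generalizing x with
  | zero =>
    rcases h with rfl | ⟨w, hw, hp⟩
    · exact Or.inl rfl
    · cases hp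
      exact Or.inr ⟨x, rfl, hw⟩
  | succ d ih =>
    rcases h with rfl | ⟨w, hw, hp⟩
    · exact Or.inl (pvPathN_refl N _ x)
    · rcases ih w hp with h1 | ⟨y, hy, hz⟩
      · exact Or.inl (Or.inr ⟨w, hw, h1⟩)
      · exact Or.inr ⟨y, Or.inr ⟨w, hw, hy⟩, hz⟩

-- can_reach decides bounded reachability
lemma pvCanReach_iff (N : Int) (target : List Int) :
    ∀ (d : Nat) (cur : List Int), pvCanReach N target d cur = true ↔ pvPathN N d cur target := by
  intro d
  induction d with
  | zero =>
    intro cur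
    rw [pvCanReach]
    by_cases h : cur = target
    · simp only [if_pos h, true_iff]
      exact h
    · rw [if_neg h]
      simp only [pvPathN]
      simp [h]
  | succ d ih =>
    intro cur
    rw [pvCanReach]
    by_cases h : cur = target
    · simp only [if_pos h, true_iff]
      exact Or.inl h
    · rw [if_neg h]
      have hpath : pvPathN N (d + 1) cur target ↔ ∃ z ∈ pvNbrs N cur, pvPathN N d z target := by
        simp only [pvPathN]
        exact or_iff_right h
      have hiff : (∃ z ∈ pvNbrs N cur, pvPathN N d z target) ↔
          (∃ z ∈ pvNbrs N cur, pvCanReach N target d z = true) := by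
        constructor
        · rintro ⟨z, hz, hp⟩; exact ⟨z, hz, (ih z).mpr hp⟩
        · rintro ⟨z, hz, hp⟩; exact ⟨z, hz, (ih z).mp hp⟩
      rw [hpath, hiff]
      simp only [pvNbrs, pvGenI, pvGenJ, pvGenK, pvSeg, pvRest, pvNew, List.any_eq_true,
        List.mem_flatMap, List.mem_filterMap, Option.ite_none_left_eq_some, Option.some.injEq]
      constructor
      · rintro ⟨i, hi, j, hj, k, hk, hv⟩
        by_cases hki : k = i
        · rw [if_pos hki] at hv; cases hv
        · rw [if_neg hki] at hv
          exact ⟨_, ⟨i, hi, j, hj, k, hk, hki, rfl⟩, hv⟩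
      · rintro ⟨z, ⟨i, hi, j, hj, k, hk, hki, rfl⟩, hv⟩
        exact ⟨i, hi, j, hj, k, hk, by rw [if_neg hki]; exact hv⟩

-- ===== characterization of one BFS level in terms of neighbour sets =====
lemma pvKloopB_hit (target seg rest : List Int) (i d : Int) :
    ∀ (ks : List Int) (vis nxt : List (List Int)), target ∈ pvGenK seg rest i ks →
      pvKloopB target seg rest i d ks vis nxt = .inr d := by
  intro ks
  induction ks with
  | nil => intro vis nxt h; simp [pvGenK] at h
  | cons k ks ih =>
    intro vis nxt h
    by_cases hki : k = i
    · simp only [pvKloopB, if_pos hki]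
      apply ih
      simpa [pvGenK, hki] using h
    · by_cases htar : pvNew seg rest k = target
      · simp only [pvKloopB, if_neg hki]
        rw [if_pos (by simpa [pvNew] using htar)]
      · have h' : target ∈ pvGenK seg rest i ks := by
          simp only [pvGenK, List.filterMap_cons, if_neg hki] at h
          rcases List.mem_cons.mp h with he | hm
          · exact absurd he.symm htar
          · exact hm
        simp only [pvKloopB, if_neg hki]
        rw [if_neg (by simpa [pvNew] using htar)]
        by_cases hc : PySem.Set.contains vis (pvNew seg rest k) = true
        · rw [if_pos (by simpa [pvNew] using hc)]
          exact ih _ _ h'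
        · rw [if_neg (by simpa [pvNew] using hc)]
          exact ih _ _ h' 

lemma pvKloopB_miss (target seg rest : List Int) (i d : Int) :
    ∀ (ks : List Int) (vis nxt : List (List Int)), target ∉ pvGenK seg rest i ks →
      ∃ Δ, pvKloopB target seg rest i d ks vis nxt = .inl (vis ++ Δ, nxt ++ Δ) ∧
        (∀ x ∈ Δ, x ∉ vis ∧ x ∈ pvGenK seg rest i ks) ∧
        (∀ x ∈ pvGenK seg rest i ks, x ∈ vis ++ Δ) := by
  intro ks
  induction ks with
  | nil =>
    intro vis nxt _
    exact ⟨[], by simp [pvKloopB], by simp, by simp [pvGenK]⟩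
  | cons k ks ih =>
    intro vis nxt h
    by_cases hki : k = i
    · have h' : target ∉ pvGenK seg rest i ks := by
        simpa [pvGenK, hki] using h
      obtain ⟨Δ, h1, h2, h3⟩ := ih vis nxt h'
      refine ⟨Δ, ?_, ?_, ?_⟩
      · simp only [pvKloopB, if_pos hki]
        exact h1
      · intro x hx
        obtain ⟨hn, hg⟩ := h2 x hx
        exact ⟨hn, by simpa [pvGenK, List.filterMap_cons, hki] using hg⟩
      · intro x hx
        exact h3 x (by simpa [pvGenK, List.filterMap_cons, hki] using hx)
    · have hgen : pvGenK seg rest i (k :: ks) = pvNew seg rest k :: pvGenK seg rest i ks := by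
        simp [pvGenK, hki]
      rw [hgen] at h
      have htar : pvNew seg rest k ≠ target := fun he => h (he ▸ List.mem_cons_self)
      have h' : target ∉ pvGenK seg rest i ks := fun hm => h (List.mem_cons_of_mem _ hm)
      by_cases hc : PySem.Set.contains vis (pvNew seg rest k) = true
      · have hmem : pvNew seg rest k ∈ vis := (PySem.Set.contains_iff vis _).mp hc
        obtain ⟨Δ, h1, h2, h3⟩ := ih vis nxt h'
        refine ⟨Δ, ?_, ?_, ?_⟩
        · simp only [pvKloopB, if_neg hki]
          rw [if_neg (by simpa [pvNew] using htar), if_pos (by simpa [pvNew] using hc)]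
          exact h1
        · intro x hx
          obtain ⟨hn, hg⟩ := h2 x hx
          exact ⟨hn, hgen ▸ List.mem_cons_of_mem _ hg⟩
        · intro x hx
          rw [hgen] at hx
          rcases List.mem_cons.mp hx with rfl | hm
          · exact List.mem_append_left _ hmem
          · exact h3 x hm
      · have hmem : pvNew seg rest k ∉ vis := fun hm =>
          hc ((PySem.Set.contains_iff vis _).mpr hm)
        have hadd : PySem.Set.add vis (pvNew seg rest k) = vis ++ [pvNew seg rest k] := by
          unfold PySem.Set.add
          rw [Bool.eq_false_iff.mpr hc]
          simp
        obtain ⟨Δ, h1, h2, h3⟩ := ih (vis ++ [pvNew seg rest k]) (nxt ++ [pvNew seg rest k]) h'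
        refine ⟨pvNew seg rest k :: Δ, ?_, ?_, ?_⟩
        · simp only [pvKloopB, if_neg hki]
          rw [if_neg (by simpa [pvNew] using htar), if_neg (by simpa [pvNew] using hc)]
          show pvKloopB target seg rest i d ks (PySem.Set.add vis (pvNew seg rest k))
              (nxt ++ [pvNew seg rest k])
            = Sum.inl (vis ++ pvNew seg rest k :: Δ, nxt ++ pvNew seg rest k :: Δ)
          rw [hadd, h1]
          simp
        · intro x hx
          rcases List.mem_cons.mp hx with rfl | hm
          · exact ⟨hmem, hgen ▸ List.mem_cons_self⟩
          · obtain ⟨hn, hg⟩ := h2 x hm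
            refine ⟨fun hv => hn (List.mem_append_left _ hv), hgen ▸ List.mem_cons_of_mem _ hg⟩
        · intro x hx
          rw [hgen] at hx
          rcases List.mem_cons.mp hx with rfl | hm
          · simp
          · have := h3 x hm
            simpa using this

lemma pvGenJ_cons (cur : List Int) (i j : Int) (js : List Int) :
    pvGenJ cur i (j :: js) = pvGenK (pvSeg cur i j) (pvRest cur i j) i
      (PySem.List.pyRange 0 (PySem.List.len (pvRest cur i j) + 1) 1) ++ pvGenJ cur i js := by
  simp [pvGenJ]

lemma pvGenI_cons (N : Int) (cur : List Int) (i : Int) (is : List Int) :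
    pvGenI N cur (i :: is) = pvGenJ cur i (PySem.List.pyRange i N 1) ++ pvGenI N cur is := by
  simp [pvGenI]

lemma pvJloopB_hit (n : Int) (target cur : List Int) (i d : Int) :
    ∀ (js : List Int) (vis nxt : List (List Int)), target ∈ pvGenJ cur i js →
      pvJloopB n target cur i d js vis nxt = .inr d := by
  intro js
  induction js with
  | nil => intro vis nxt h; simp [pvGenJ] at h
  | cons j js ih =>
    intro vis nxt h
    rw [pvGenJ_cons] at h
    by_cases hk : target ∈ pvGenK (pvSeg cur i j) (pvRest cur i j) i
        (PySem.List.pyRange 0 (PySem.List.len (pvRest cur i j) + 1) 1)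
    · have hK := pvKloopB_hit target (PySem.List.slice cur (some i) (some (j + 1)))
        (PySem.List.slice cur none (some i) ++ PySem.List.slice cur (some (j + 1)) none) i d
        (PySem.List.pyRange 0 (PySem.List.len (PySem.List.slice cur none (some i) ++ PySem.List.slice cur (some (j + 1)) none) + 1) 1) vis nxt (by exact hk)
      simp only [pvJloopB]
      rw [hK]
    · have hj2 : target ∈ pvGenJ cur i js := by
        rcases List.mem_append.mp h with h1 | h2
        · exact absurd h1 hk
        · exact h2
      obtain ⟨Δ, h1, _, _⟩ := pvKloopB_miss target (PySem.List.slice cur (some i) (some (j + 1)))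
        (PySem.List.slice cur none (some i) ++ PySem.List.slice cur (some (j + 1)) none) i d
        (PySem.List.pyRange 0 (PySem.List.len (PySem.List.slice cur none (some i) ++ PySem.List.slice cur (some (j + 1)) none) + 1) 1) vis nxt (by exact hk)
      simp only [pvJloopB]
      rw [h1]
      exact ih _ _ hj2

lemma pvJloopB_miss (n : Int) (target cur : List Int) (i d : Int) :
    ∀ (js : List Int) (vis nxt : List (List Int)), target ∉ pvGenJ cur i js →
      ∃ Δ, pvJloopB n target cur i d js vis nxt = .inl (vis ++ Δ, nxt ++ Δ) ∧
        (∀ x ∈ Δ, x ∉ vis ∧ x ∈ pvGenJ cur i js) ∧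
        (∀ x ∈ pvGenJ cur i js, x ∈ vis ++ Δ) := by
  intro js
  induction js with
  | nil =>
    intro vis nxt _
    exact ⟨[], by simp [pvJloopB], by simp, by simp [pvGenJ]⟩
  | cons j js ih =>
    intro vis nxt h
    rw [pvGenJ_cons] at h
    have hk : target ∉ pvGenK (pvSeg cur i j) (pvRest cur i j) i
        (PySem.List.pyRange 0 (PySem.List.len (pvRest cur i j) + 1) 1) :=
      fun hm => h (List.mem_append_left _ hm)
    have hj2 : target ∉ pvGenJ cur i js := fun hm => h (List.mem_append_right _ hm)
    obtain ⟨Δ1, h1, h2, h3⟩ := pvKloopB_miss target (PySem.List.slice cur (some i) (some (j + 1)))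
      (PySem.List.slice cur none (some i) ++ PySem.List.slice cur (some (j + 1)) none) i d
      (PySem.List.pyRange 0 (PySem.List.len (PySem.List.slice cur none (some i) ++ PySem.List.slice cur (some (j + 1)) none) + 1) 1) vis nxt (by exact hk)
    obtain ⟨Δ2, g1, g2, g3⟩ := ih (vis ++ Δ1) (nxt ++ Δ1) hj2
    refine ⟨Δ1 ++ Δ2, ?_, ?_, ?_⟩
    · simp only [pvJloopB]
      rw [h1]
      show pvJloopB n target cur i d js (vis ++ Δ1) (nxt ++ Δ1) = _
      rw [g1]
      simp
    · intro x hx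
      rw [pvGenJ_cons]
      rcases List.mem_append.mp hx with hx1 | hx2
      · obtain ⟨hn, hg⟩ := h2 x hx1
        exact ⟨hn, List.mem_append_left _ (by exact hg)⟩
      · obtain ⟨hn, hg⟩ := g2 x hx2
        exact ⟨fun hv => hn (List.mem_append_left _ hv), List.mem_append_right _ hg⟩
    · intro x hx
      rw [pvGenJ_cons] at hx
      rcases List.mem_append.mp hx with hx1 | hx2
      · have := h3 x (by exact hx1)
        rcases List.mem_append.mp this with hv | hd
        · exact List.mem_append_left _ hv
        · exact List.mem_append_right _ (List.mem_append_left _ hd)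
      · have := g3 x hx2
        simpa [List.append_assoc] using this

lemma pvIloopB_hit (N : Int) (target cur : List Int) (d : Int) :
    ∀ (is : List Int) (vis nxt : List (List Int)), target ∈ pvGenI N cur is →
      pvIloopB N target cur d is vis nxt = .inr d := by
  intro is
  induction is with
  | nil => intro vis nxt h; simp [pvGenI] at h
  | cons i is ih =>
    intro vis nxt h
    rw [pvGenI_cons] at h
    by_cases hk : target ∈ pvGenJ cur i (PySem.List.pyRange i N 1)
    · have hJ := pvJloopB_hit N target cur i d (PySem.List.pyRange i N 1) vis nxt hk
      simp only [pvIloopB]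
      rw [hJ]
    · have hi2 : target ∈ pvGenI N cur is := by
        rcases List.mem_append.mp h with h1 | h2
        · exact absurd h1 hk
        · exact h2
      obtain ⟨Δ, h1, _, _⟩ := pvJloopB_miss N target cur i d (PySem.List.pyRange i N 1) vis nxt hk
      simp only [pvIloopB]
      rw [h1]
      exact ih _ _ hi2

lemma pvIloopB_miss (N : Int) (target cur : List Int) (d : Int) :
    ∀ (is : List Int) (vis nxt : List (List Int)), target ∉ pvGenI N cur is →
      ∃ Δ, pvIloopB N target cur d is vis nxt = .inl (vis ++ Δ, nxt ++ Δ) ∧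
        (∀ x ∈ Δ, x ∉ vis ∧ x ∈ pvGenI N cur is) ∧
        (∀ x ∈ pvGenI N cur is, x ∈ vis ++ Δ) := by
  intro is
  induction is with
  | nil =>
    intro vis nxt _
    exact ⟨[], by simp [pvIloopB], by simp, by simp [pvGenI]⟩
  | cons i is ih =>
    intro vis nxt h
    rw [pvGenI_cons] at h
    have hk : target ∉ pvGenJ cur i (PySem.List.pyRange i N 1) :=
      fun hm => h (List.mem_append_left _ hm)
    have hi2 : target ∉ pvGenI N cur is := fun hm => h (List.mem_append_right _ hm)
    obtain ⟨Δ1, h1, h2, h3⟩ := pvJloopB_miss N target cur i d (PySem.List.pyRange i N 1) vis nxt hk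
    obtain ⟨Δ2, g1, g2, g3⟩ := ih (vis ++ Δ1) (nxt ++ Δ1) hi2
    refine ⟨Δ1 ++ Δ2, ?_, ?_, ?_⟩
    · simp only [pvIloopB]
      rw [h1]
      show pvIloopB N target cur d is (vis ++ Δ1) (nxt ++ Δ1) = _
      rw [g1]
      simp
    · intro x hx
      rw [pvGenI_cons]
      rcases List.mem_append.mp hx with hx1 | hx2
      · obtain ⟨hn, hg⟩ := h2 x hx1
        exact ⟨hn, List.mem_append_left _ hg⟩
      · obtain ⟨hn, hg⟩ := g2 x hx2
        exact ⟨fun hv => hn (List.mem_append_left _ hv), List.mem_append_right _ hg⟩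
    · intro x hx
      rw [pvGenI_cons] at hx
      rcases List.mem_append.mp hx with hx1 | hx2
      · have := h3 x hx1
        rcases List.mem_append.mp this with hv | hd
        · exact List.mem_append_left _ hv
        · exact List.mem_append_right _ (List.mem_append_left _ hd)
      · have := g3 x hx2
        simpa [List.append_assoc] using this

lemma pvLevelB_hit (N : Int) (target : List Int) (d : Int) :
    ∀ (frontier vis nxt : List (List Int)), (∃ c ∈ frontier, target ∈ pvNbrs N c) →
      pvLevelB N target d frontier vis nxt = .inr d := by
  intro frontier
  induction frontier with
  | nil => rintro vis nxt ⟨c, hc, _⟩; simp at hc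
  | cons cur rest ih =>
    rintro vis nxt ⟨c, hc, htar⟩
    by_cases hcur : target ∈ pvNbrs N cur
    · have hI := pvIloopB_hit N target cur d (PySem.List.pyRange 0 N 1) vis nxt hcur
      simp only [pvLevelB]
      rw [hI]
    · have hc2 : c ∈ rest := by
        rcases List.mem_cons.mp hc with rfl | hm
        · exact absurd htar hcur
        · exact hm
      obtain ⟨Δ, h1, _, _⟩ := pvIloopB_miss N target cur d (PySem.List.pyRange 0 N 1) vis nxt hcur
      simp only [pvLevelB]
      rw [h1]
      exact ih _ _ ⟨c, hc2, htar⟩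

lemma pvLevelB_miss (N : Int) (target : List Int) (d : Int) :
    ∀ (frontier vis nxt : List (List Int)), (∀ c ∈ frontier, target ∉ pvNbrs N c) →
      ∃ Δ, pvLevelB N target d frontier vis nxt = .inl (vis ++ Δ, nxt ++ Δ) ∧
        (∀ x ∈ Δ, x ∉ vis ∧ ∃ c ∈ frontier, x ∈ pvNbrs N c) ∧
        (∀ c ∈ frontier, ∀ x ∈ pvNbrs N c, x ∈ vis ++ Δ) := by
  intro frontier
  induction frontier with
  | nil =>
    intro vis nxt _
    exact ⟨[], by simp [pvLevelB], by simp, by simp⟩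
  | cons cur rest ih =>
    intro vis nxt h
    have hcur : target ∉ pvNbrs N cur := h cur List.mem_cons_self
    have hrest : ∀ c ∈ rest, target ∉ pvNbrs N c := fun c hc => h c (List.mem_cons_of_mem _ hc)
    obtain ⟨Δ1, h1, h2, h3⟩ := pvIloopB_miss N target cur d (PySem.List.pyRange 0 N 1) vis nxt hcur
    obtain ⟨Δ2, g1, g2, g3⟩ := ih (vis ++ Δ1) (nxt ++ Δ1) hrest
    refine ⟨Δ1 ++ Δ2, ?_, ?_, ?_⟩
    · simp only [pvLevelB]
      rw [h1]
      show pvLevelB N target d rest (vis ++ Δ1) (nxt ++ Δ1) = _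
      rw [g1]
      simp
    · intro x hx
      rcases List.mem_append.mp hx with hx1 | hx2
      · obtain ⟨hn, hg⟩ := h2 x hx1
        exact ⟨hn, cur, List.mem_cons_self, hg⟩
      · obtain ⟨hn, c, hc, hg⟩ := g2 x hx2
        exact ⟨fun hv => hn (List.mem_append_left _ hv), c, List.mem_cons_of_mem _ hc, hg⟩
    · intro c hc x hx
      rcases List.mem_cons.mp hc with rfl | hm
      · have := h3 x hx
        rcases List.mem_append.mp this with hv | hd
        · exact List.mem_append_left _ hv
        · exact List.mem_append_right _ (List.mem_append_left _ hd)
      · have := g3 c hm x hx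
        simpa [List.append_assoc] using this

lemma pvClosed (N : Int) (vis : List (List Int))
    (hcl : ∀ y ∈ vis, ∀ x ∈ pvNbrs N y, x ∈ vis) :
    ∀ (d : Nat) (s : List Int), s ∈ vis → ∀ x, pvPathN N d s x → x ∈ vis := by
  intro d
  induction d with
  | zero => intro s hs x hx; exact hx ▸ hs
  | succ d ih =>
    intro s hs x hx
    rcases hx with rfl | ⟨z, hz, hp⟩
    · exact hs
    · exact ih z (hcl s hs z hz) x hp

-- the level BFS returns the exact graph distance
lemma pvMainB_correct (N : Int) (target perm : List Int) (D : Nat)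
    (hmin : ∀ e : Nat, e < D → ¬ pvPathN N e perm target)
    (hD : pvPathN N D perm target) :
    ∀ (fuel : Nat) (t : Nat) (vis frontier : List (List Int)),
      perm ∈ vis →
      (∀ x ∈ vis, pvPathN N t perm x) →
      (∀ x ∈ frontier, x ∈ vis) →
      (∀ x, pvPathN N (t + 1) perm x → x ∈ vis ∨ ∃ c ∈ frontier, x ∈ pvNbrs N c) →
      (∀ y ∈ vis, y ∉ frontier → ∀ x ∈ pvNbrs N y, x ∈ vis) →
      target ∉ vis →
      t < D → D ≤ fuel + t →
      pvMainB N target fuel frontier vis (t : Int) = (D : Int) := by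
  intro fuel
  induction fuel with
  | zero =>
    intro t vis frontier _ _ _ _ _ _ htD hDf
    omega
  | succ fuel ih =>
    intro t vis frontier hP hV hF1 hF2 hC hNT htD hDf
    by_cases hfr : frontier = []
    · subst hfr
      have hcl : ∀ y ∈ vis, ∀ x ∈ pvNbrs N y, x ∈ vis := fun y hy => hC y hy (by simp)
      exact absurd (pvClosed N vis hcl D perm hP target hD) hNT
    · by_cases hhit : ∃ c ∈ frontier, target ∈ pvNbrs N c
      · have hres := pvLevelB_hit N target ((t : Int) + 1) frontier vis [] hhit
        have heq : pvMainB N target (fuel + 1) frontier vis (t : Int) = (t : Int) + 1 := by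
          simp only [pvMainB, if_neg hfr]
          rw [hres]
        rw [heq]
        obtain ⟨c, hc, htar⟩ := hhit
        have hpt1 : pvPathN N (t + 1) perm target :=
          pvPathN_snoc N t perm c target (hV c (hF1 c hc)) htar
        have hDt : D = t + 1 := by
          by_contra hne
          exact hmin (t + 1) (by omega) hpt1
        rw [hDt]
        push_cast
        ring
      · push Not at hhit
        obtain ⟨Δ, h1, h2, h3⟩ := pvLevelB_miss N target ((t : Int) + 1) frontier vis [] hhit
        have hstep : pvMainB N target (fuel + 1) frontier vis (t : Int)
            = pvMainB N target fuel Δ (vis ++ Δ) ((t : Int) + 1) := by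
          simp only [pvMainB, if_neg hfr]
          rw [h1]
          show pvMainB N target fuel ([] ++ Δ) (vis ++ Δ) ((t : Int) + 1) = _
          rw [List.nil_append]
        have hnt1 : ¬ pvPathN N (t + 1) perm target := by
          intro hp
          rcases hF2 target hp with hv | ⟨c, hc, htar⟩
          · exact hNT hv
          · exact hhit c hc htar
        have ht1D : t + 1 < D := by
          rcases Nat.lt_or_ge (t + 1) D with h | h
          · exact h
          · have : D = t + 1 := by omega
            exact absurd (this ▸ hD) hnt1
        have hTΔ : target ∉ Δ := by
          intro hm
          obtain ⟨_, c, hc, htar⟩ := h2 target hm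
          exact hhit c hc htar
        rw [hstep]
        have hrec := ih (t + 1) (vis ++ Δ) Δ
          (List.mem_append_left _ hP)
          (by
            intro x hx
            rcases List.mem_append.mp hx with hv | hΔ
            · exact pvPathN_mono N t perm x (hV x hv)
            · obtain ⟨_, c, hc, htar⟩ := h2 x hΔ
              exact pvPathN_snoc N t perm c x (hV c (hF1 c hc)) htar)
          (fun x hx => List.mem_append_right _ hx)
          (by
            intro x hx
            rcases pvPathN_inv N (t + 1) perm x hx with hshort | ⟨y, hy, hxy⟩
            · rcases hF2 x hshort with hv | ⟨c, hc, hxc⟩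
              · exact Or.inl (List.mem_append_left _ hv)
              · exact Or.inl (h3 c hc x hxc)
            · rcases hF2 y hy with hyv | ⟨c, hc, hyc⟩
              · by_cases hyf : y ∈ frontier
                · exact Or.inl (h3 y hyf x hxy)
                · exact Or.inl (List.mem_append_left _ (hC y hyv hyf x hxy))
              · rcases List.mem_append.mp (h3 c hc y hyc) with hyv | hyΔ
                · by_cases hyf : y ∈ frontier
                  · exact Or.inl (h3 y hyf x hxy)
                  · exact Or.inl (List.mem_append_left _ (hC y hyv hyf x hxy))
                · exact Or.inr ⟨y, hyΔ, hxy⟩)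
          (by
            intro y hy hyΔ x hx
            rcases List.mem_append.mp hy with hyv | hyΔ'
            · by_cases hyf : y ∈ frontier
              · exact h3 y hyf x hx
              · exact List.mem_append_left _ (hC y hyv hyf x hx)
            · exact absurd hyΔ' hyΔ)
          (by
            intro hm
            rcases List.mem_append.mp hm with hv | hΔ
            · exact hNT hv
            · exact hTΔ hΔ)
          ht1D (by omega)
        have hcast : ((t + 1 : Nat) : Int) = (t : Int) + 1 := by push_cast; ring
        rw [hcast] at hrec
        exact hrec

lemma pvFullPrefix (N : Int) (x : List Int) (hlen : x.length = N.toNat)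
    (hpre : ∀ t : Nat, t < x.length → x.getD t 0 = t) : x = PySem.List.pyRange 0 N 1 := by
  apply List.ext_getElem (by rw [hlen, PySem.List.length_pyRange_one]; omega)
  intro t h1 h2
  have hx := hpre t h1
  rw [List.getD_eq_getElem x 0 h1] at hx
  rw [hx, PySem.List.getElem_pyRange_one]
  omega

lemma pvLastForced (N : Int) (x : List Int) (hperm : x.Perm (PySem.List.pyRange 0 N 1)) (p : Nat)
    (hp : x.length ≤ p + 1) (hpre : ∀ t : Nat, t < p → x.getD t 0 = t) :
    ∀ t : Nat, t < x.length → x.getD t 0 = t := by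
  intro t ht
  rcases Nat.lt_or_ge t p with h | h
  · exact hpre t h
  · have htp : t = p := by omega
    have hnd : x.Nodup := hperm.nodup_iff.mpr (PySem.List.nodup_pyRange_one 0 N)
    have hvmem : x[t]'ht ∈ PySem.List.pyRange 0 N 1 := hperm.mem_iff.mp (List.getElem_mem ht)
    have hvb := PySem.List.mem_pyRange_one.mp hvmem
    have hlenN : x.length = N.toNat := by
      rw [hperm.length_eq, PySem.List.length_pyRange_one]
      omega
    by_contra hne
    rw [List.getD_eq_getElem x 0 ht] at hne
    have hvt : (x[t]'ht).toNat < x.length := by omega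
    have hvp : (x[t]'ht).toNat < p := by
      rcases Nat.lt_or_ge (x[t]'ht).toNat p with h' | h'
      · exact h'
      · exfalso
        apply hne
        omega
    have hfix := hpre (x[t]'ht).toNat hvp
    rw [List.getD_eq_getElem x 0 hvt] at hfix
    have hEq : x[(x[t]'ht).toNat]'hvt = x[t]'ht := by
      rw [hfix]
      omega
    have := (List.Nodup.getElem_inj_iff hnd).mp hEq
    omega

-- a permutation of range(N) sorts in at most N-1 cut-and-insert moves
lemma pvPrefixSort (N : Int) :
    ∀ (k p : Nat) (x : List Int), N.toNat ≤ p + k + 1 →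
      x.Perm (PySem.List.pyRange 0 N 1) → (∀ t : Nat, t < p → x.getD t 0 = t) →
      pvPathN N k x (PySem.List.pyRange 0 N 1) := by
  intro k
  induction k with
  | zero =>
    intro p x hk hperm hpre
    have hlen : x.length = N.toNat := by
      rw [hperm.length_eq, PySem.List.length_pyRange_one]
      omega
    show x = PySem.List.pyRange 0 N 1
    exact pvFullPrefix N x hlen (pvLastForced N x hperm p (by omega) hpre)
  | succ k ih =>
    intro p x hk hperm hpre
    by_cases hxt : x = PySem.List.pyRange 0 N 1
    · exact hxt ▸ pvPathN_refl N (k + 1) _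
    · have hlen : x.length = N.toNat := by
        rw [hperm.length_eq, PySem.List.length_pyRange_one]
        omega
      by_cases hstep : x.getD p 0 = p
      · have hpre' : ∀ t : Nat, t < p + 1 → x.getD t 0 = t := by
          intro t ht
          rcases Nat.lt_or_ge t p with h | h
          · exact hpre t h
          · have : t = p := by omega
            rw [this]
            exact hstep
        exact pvPathN_mono N k x _ (ih (p + 1) x (by omega) hperm hpre')
      · have hpN : p < N.toNat := by
          by_contra hge
          push Not at hge
          exact hxt (pvFullPrefix N x hlen (fun t ht => hpre t (by omega)))
        have hplt : p < x.length := by omega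
        have hmemp : (p : Int) ∈ x := by
          apply hperm.mem_iff.mpr
          apply PySem.List.mem_pyRange_one.mpr
          exact ⟨Int.natCast_nonneg p, by omega⟩
        set q := List.idxOf (p : Int) x with hq
        have hqlt : q < x.length := List.idxOf_lt_length_of_mem hmemp
        have hxq : x[q] = (p : Int) := List.getElem_idxOf hqlt
        have hxqD : x.getD q 0 = (p : Int) := by
          rw [List.getD_eq_getElem x 0 hqlt]
          exact hxq
        have hqp : p < q := by
          rcases Nat.lt_trichotomy q p with h | h | h
          · exfalso
            have h2 := hpre q h
            rw [hxqD] at h2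
            omega
          · exfalso
            rw [h] at hxqD
            exact hstep hxqD
          · exact h
        have h0q : (0 : Int) ≤ (q : Int) := Int.natCast_nonneg q
        have hrest : pvRest x (q : Int) (q : Int) = x.take q ++ x.drop (q + 1) := by
          unfold pvRest
          rw [PySem.List.slice_to x h0q,
            PySem.List.slice_from x (by omega : (0 : Int) ≤ (q : Int) + 1)]
          have e1 : ((q : Int)).toNat = q := Int.toNat_natCast q
          have e2 : ((q : Int) + 1).toNat = q + 1 := by omega
          rw [e1, e2]
        have hrlen : (pvRest x (q : Int) (q : Int)).length = x.length - 1 := by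
          rw [hrest]
          simp [List.length_take, List.length_drop]
          omega
        have hseg : pvSeg x (q : Int) (q : Int) = [(p : Int)] := by
          unfold pvSeg
          rw [PySem.List.slice_toNat x h0q (by omega : (0 : Int) ≤ (q : Int) + 1)]
          have e1 : ((q : Int)).toNat = q := Int.toNat_natCast q
          have e2 : ((q : Int) + 1).toNat = q + 1 := by omega
          rw [e1, e2]
          rw [List.drop_eq_getElem_cons hqlt, hxq]
          have e3 : q + 1 - q = 1 := by omega
          rw [e3]
          simp
        have hymem : pvNew (pvSeg x (q : Int) (q : Int)) (pvRest x (q : Int) (q : Int)) (p : Int)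
            ∈ pvNbrs N x := by
          rw [mem_pvNbrs]
          refine ⟨(q : Int), ?_, (q : Int), ?_, (p : Int), ?_, ?_, rfl⟩
          · exact PySem.List.mem_pyRange_one.mpr ⟨h0q, by omega⟩
          · exact PySem.List.mem_pyRange_one.mpr ⟨le_refl _, by omega⟩
          · apply PySem.List.mem_pyRange_one.mpr
            refine ⟨Int.natCast_nonneg p, ?_⟩
            rw [PySem.List.len_eq, hrlen]
            omega
          · intro he
            omega
        set y := pvNew (pvSeg x (q : Int) (q : Int)) (pvRest x (q : Int) (q : Int)) (p : Int)
          with hydef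
        have hyeq : y = x.take p ++ (p : Int) :: (x.take q ++ x.drop (q + 1)).drop p := by
          rw [hydef]
          unfold pvNew
          rw [hseg, hrest]
          rw [PySem.List.slice_to _ (Int.natCast_nonneg p),
            PySem.List.slice_from _ (Int.natCast_nonneg p)]
          have e : ((p : Int)).toNat = p := Int.toNat_natCast p
          rw [e]
          have htp : (x.take q ++ x.drop (q + 1)).take p = x.take p := by
            rw [List.take_append_of_le_length (by simp [List.length_take]; try omega)]
            rw [List.take_take]
            congr 1
            omega
          rw [htp]
          simp
        have hyperm : y.Perm (PySem.List.pyRange 0 N 1) := (pvNbrs_perm N x y hymem).trans hperm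
        have hypre : ∀ t : Nat, t < p + 1 → y.getD t 0 = t := by
          intro t ht
          rw [hyeq]
          rcases Nat.lt_or_ge t p with h | h
          · rw [List.getD_append _ _ _ _ (by simp [List.length_take]; try omega)]
            have e : (x.take p).getD t 0 = x.getD t 0 := by
              rw [List.getD_eq_getElem _ 0 (by simp [List.length_take]; try omega),
                List.getD_eq_getElem x 0 (by omega)]
              simp [List.getElem_take]
            rw [e]
            exact hpre t h
          · have htpe : t = p := by omega
            rw [htpe]
            rw [List.getD_append_right _ _ _ _ (by simp [List.length_take]; try omega)]
            have e : p - (x.take p).length = 0 := by simp [List.length_take]; try omega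
            rw [e]
            simp
        have hpath := ih (p + 1) y (by omega) hyperm hypre
        exact Or.inr ⟨y, hymem, hpath⟩

-- the deepening loop returns the least sufficient depth
lemma pvIterDeep_eq (N : Int) (target perm : List Int) (D : Nat)
    (hmin : ∀ e : Nat, e < D → ¬ pvPathN N e perm target)
    (hD : pvPathN N D perm target) :
    ∀ (a : Int), 1 ≤ a → a ≤ (D : Int) → (D : Int) < N →
      pvIterDeep N target perm (PySem.List.pyRange a N 1) = (D : Int) := by
  have key : ∀ (m : Nat) (a : Int), 1 ≤ a → a ≤ (D : Int) → (D : Int) < N →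
      (D : Int) - a = (m : Int) →
      pvIterDeep N target perm (PySem.List.pyRange a N 1) = (D : Int) := by
    intro m
    induction m with
    | zero =>
      intro a h1 h2 h3 hm
      have haD : a = (D : Int) := by omega
      rw [PySem.List.pyRange_one_cons (by omega : a < N)]
      simp only [pvIterDeep]
      have hcr : pvCanReach N target a.toNat perm = true := by
        apply (pvCanReach_iff N target a.toNat perm).mpr
        have : a.toNat = D := by omega
        rw [this]
        exact hD
      rw [if_pos hcr, haD]
    | succ m ihm =>
      intro a h1 h2 h3 hm
      rw [PySem.List.pyRange_one_cons (by omega : a < N)]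
      simp only [pvIterDeep]
      have hcr : pvCanReach N target a.toNat perm = false := by
        by_contra hc
        have hc' : pvCanReach N target a.toNat perm = true := by
          revert hc
          cases pvCanReach N target a.toNat perm <;> simp
        exact hmin a.toNat (by omega) ((pvCanReach_iff N target a.toNat perm).mp hc')
      rw [hcr]
      simp only [Bool.false_eq_true, if_false]
      exact ihm (a + 1) (by omega) (by omega) h3 (by omega)
  intro a h1 h2 h3
  exact key ((D : Int) - a).toNat a h1 h2 h3 (by omega)

-- ===== VERDICT (by name: the statement is the Claim_ definition above) =====
theorem min_cut_insert_moves_spec : Claim_equal_min_cut_insert_moves := by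
  intro N shuffled original _hdom
  unfold Spec_min_cut_insert_moves
  simp only [min_cut_insert_moves, min_cut_insert_moves_alt]
  rw [pvPermBuildB_eq]
  cases hA : pvPermA (pvPos original) shuffled with
  | none => simp
  | some perm =>
    simp only [Option.map_some, List.nil_append]
    by_cases hpt : perm = PySem.List.pyRange 0 N 1
    · rw [if_pos hpt, if_pos hpt]
    · rw [if_neg hpt, if_neg hpt]
      by_cases hsorted :
          PySem.List.sorted perm (fun x => x) false = PySem.List.pyRange 0 N 1
      · rw [if_pos hsorted]
        have hp : perm.Perm (PySem.List.pyRange 0 N 1) := (pvSorted_iff perm N).mp hsorted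
        have hNpos : 0 < N := by
          by_contra hN
          have : PySem.List.pyRange 0 N 1 = [] := PySem.List.pyRange_one_eq_nil (by omega)
          rw [this] at hp hpt
          exact hpt (List.Perm.eq_nil hp)
        have hlenN : (perm.length : Int) = N := by
          have := hp.length_eq
          rw [PySem.List.length_pyRange_one] at this
          omega
        have hlenshuf : perm.length = shuffled.length :=
          (pvPermA_facts (pvPos original) shuffled perm hA).1
        have hLM : perm.length ≤ original.length := by
          have hmemt : N - 1 ∈ PySem.List.pyRange 0 N 1 :=
            PySem.List.mem_pyRange_one.mpr (by omega)
          have hmemp : N - 1 ∈ perm := hp.mem_iff.mpr hmemt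
          obtain ⟨s, hs⟩ := (pvPermA_facts (pvPos original) shuffled perm hA).2 _ hmemp
          have := pvPos_values original (pvRstripNL s) (N - 1) hs
          omega
        have hC : perm.length ^ perm.length ≤ original.length ^ shuffled.length := by
          rw [← hlenshuf]
          exact Nat.pow_le_pow_left hLM _
        have hkeys0 : (PySem.Dict.empty.insert perm (0 : Int)).keys = [perm] := by
          rw [PySem.Dict.keys_insert_of_not_contains _ _ (by rw [PySem.Dict.contains_empty])]
          rw [PySem.Dict.keys_empty]
          simp
        have hmain := pvMain_corr N (PySem.List.pyRange 0 N 1) perm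
          (perm.length ^ perm.length) (pvCardBound perm)
          (original.length ^ shuffled.length + 2) [perm] []
          (PySem.Dict.empty.insert perm (0 : Int)) 0
          (original.length ^ shuffled.length + 2)
          (by rw [hkeys0]; simp)
          (by intro s hs; rw [List.mem_singleton] at hs; subst hs
              exact PySem.Dict.get?_insert_self _ _ _)
          (by intro s hs; rw [hkeys0, List.mem_singleton] at hs; subst hs; exact List.Perm.refl _)
          (by rw [hkeys0]; simp)
          (by simpa using by omega)
          (by simp; omega)
        simp only [List.nil_append, List.length_nil] at hmain
        rw [hmain, hkeys0]
        -- the shortest number of moves D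
        have hreach : pvPathN N (N.toNat - 1) perm (PySem.List.pyRange 0 N 1) :=
          pvPrefixSort N (N.toNat - 1) 0 perm (by omega) hp
            (fun t ht => absurd ht (Nat.not_lt_zero t))
        haveI : DecidablePred (fun d : Nat => pvPathN N d perm (PySem.List.pyRange 0 N 1)) :=
          Classical.decPred _
        have hex : ∃ d, pvPathN N d perm (PySem.List.pyRange 0 N 1) := ⟨_, hreach⟩
        have hDpath : pvPathN N (Nat.find hex) perm (PySem.List.pyRange 0 N 1) :=
          Nat.find_spec hex
        have hmin : ∀ e : Nat, e < Nat.find hex →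
            ¬ pvPathN N e perm (PySem.List.pyRange 0 N 1) :=
          fun e he => Nat.find_min hex he
        have hD1 : 1 ≤ Nat.find hex := by
          rcases Nat.eq_zero_or_pos (Nat.find hex) with h0 | h1
          · exfalso
            have := hDpath
            rw [h0] at this
            exact hpt this
          · exact h1
        have hDle : Nat.find hex ≤ N.toNat - 1 := Nat.find_min' hex hreach
        have hN2 : 2 ≤ N.toNat := by omega
        have hfuel : Nat.find hex ≤ original.length ^ shuffled.length + 2 := by
          have hS : 2 ≤ shuffled.length := by
            have : perm.length = N.toNat := by omega
            omega
          have hL2 : 2 ≤ original.length := by omega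
          have h2p : shuffled.length < 2 ^ shuffled.length := Nat.lt_two_pow_self
          have hpow : 2 ^ shuffled.length ≤ original.length ^ shuffled.length :=
            Nat.pow_le_pow_left hL2 _
          have : N.toNat = shuffled.length := by omega
          omega
        have hAside := pvMainB_correct N (PySem.List.pyRange 0 N 1) perm (Nat.find hex)
          hmin hDpath (original.length ^ shuffled.length + 2) 0 [perm] [perm]
          (List.mem_singleton.mpr rfl)
          (by intro x hx; rw [List.mem_singleton] at hx; subst hx; exact pvPathN_refl N 0 _)
          (fun x hx => hx)
          (by
            intro x hx
            have hx' : perm = x ∨ ∃ z ∈ pvNbrs N perm, pvPathN N 0 z x := hx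
            rcases hx' with rfl | ⟨z, hz, hp0⟩
            · exact Or.inl (List.mem_singleton.mpr rfl)
            · have hzx : z = x := hp0
              subst hzx
              exact Or.inr ⟨perm, List.mem_singleton.mpr rfl, hz⟩)
          (by
            intro y hy hyf
            exact absurd hy hyf)
          (by
            intro hm
            rw [List.mem_singleton] at hm
            exact hpt hm.symm)
          hD1 (by omega)
        have hBside := pvIterDeep_eq N (PySem.List.pyRange 0 N 1) perm (Nat.find hex)
          hmin hDpath 1 (le_refl 1) (by omega) (by omega)
        rw [hBside]
        simpa using hAside
      · rw [if_neg hsorted]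
        have hnp : ¬ perm.Perm (PySem.List.pyRange 0 N 1) := fun h =>
          hsorted ((pvSorted_iff perm N).mpr h)
        exact pvMainA_noTarget N (PySem.List.pyRange 0 N 1) perm
          (fun h => hnp h.symm) _ [perm] 0 _
          (by intro s hs; rw [List.mem_singleton] at hs; subst hs; exact List.Perm.refl _)
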